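-- pv_equiv track=rewrite | github.com/chuhanuman/tetrispuzzlesolver | tetrispuzzlesolver.py | findemptyregions
-- ===== SOURCE A (Python) =====
-- def findemptyregions(board):
--     regions=[]
--     y=-1
--     for line in board:
--         y+=1
--         x=-1
--         for tile in line:
--             x+=1
--             if tile==0:
--                 region=[]
--                 if y!=0:
--                     if board[y-1][x]==0:
--                         temp=0
--                         for reg in regions:
--                             if [y-1,x] in reg:
--                                 region.append(temp)
--                             else:
--                                 temp+=1
--                 if x!=0:
--                     if board[y][x-1]==0:
--                         temp=0
--                         for reg in regions:
--                             if [y,x-1] in reg: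
--                                 if temp not in region:
--                                     region.append(temp)
--                             else:
--                                 temp+=1
--                 if region==[]:
--                     regions.append([[y,x]])
--                 else:
--                     regions[region[0]].append([y,x])
--                     if len(region)>1:
--                         regions[region[0]]+=regions[region[1]]
--                         regions.pop(region[1])
--     miniboards=[]
--     positions=[]
--     for region in regions:
--         if len(region)%4!=0:
--             return False
--         """miny=100
--         minx=100
--         maxy=0
--         maxx=0
--         for [y,x] in region:
--             if y<miny:
--                 miny=y
--             if y>maxy:
--                 maxy=y
--             if x<minx:
--                 minx=x
--             if x>maxx:
--                 maxx=x
--         tempboard=[]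
--         for y in range(miny,maxy+1):
--             tempboard.append(board[y][minx:maxx+1])
--         miniboards.append(tempboard)
--         positions.append([miny,minx])
--     return [miniboards,positions]"""
--     return True
-- ===== SOURCE B (Python) =====
-- def findemptyregions(board):
--     # Flood fill: DFS each unseen empty cell's component and check its size % 4.
--     seen = set()
--     for y, row in enumerate(board):
--         for x, tile in enumerate(row):
--             if tile == 0 and (y, x) not in seen:
--                 seen.add((y, x))
--                 stack = [(y, x)]
--                 size = 0
--                 while stack:
--                     cy, cx = stack.pop()
--                     size += 1
--                     for ny, nx in ((cy - 1, cx), (cy + 1, cx), (cy, cx - 1), (cy, cx + 1)):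
--                         if 0 <= ny < len(board) and 0 <= nx < len(board[ny]) \
--                                 and board[ny][nx] == 0 and (ny, nx) not in seen:
--                             seen.add((ny, nx))
--                             stack.append((ny, nx))
--                 if size % 4 != 0:
--                     return False
--     return True
-- ===== Notes on version B (the rewrite author's own statement) =====
-- stated objective: alternative
-- what changed: A labels regions during a row scan, hunting indices by scanning every region list for each empty cell and merging/popping region lists; B instead flood-fills: for each unseen empty cell it runs an explicit-stack DFS over the four neighbours with a visited set, counting the component's size and checking it mod 4.
import Mathlib
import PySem

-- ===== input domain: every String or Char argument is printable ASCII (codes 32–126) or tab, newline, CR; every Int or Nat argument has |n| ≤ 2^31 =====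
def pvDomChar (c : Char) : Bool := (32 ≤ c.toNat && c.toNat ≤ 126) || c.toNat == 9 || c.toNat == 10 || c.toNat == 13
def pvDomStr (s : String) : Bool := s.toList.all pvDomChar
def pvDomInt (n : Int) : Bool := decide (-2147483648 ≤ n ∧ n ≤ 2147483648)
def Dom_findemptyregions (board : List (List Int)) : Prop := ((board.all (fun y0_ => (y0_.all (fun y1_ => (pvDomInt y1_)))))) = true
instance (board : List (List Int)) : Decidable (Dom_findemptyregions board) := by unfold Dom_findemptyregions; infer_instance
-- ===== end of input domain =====

-- B replaces A's region-list labeling/merging scan by a flood fill: an explicit-stack DFS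
-- from each unseen empty cell with a visited set, checking each component's size mod 4
-- (objective: alternative). Equivalence is proved on Pre_ (exactly where Python A returns;
-- A raises IndexError on some ragged boards).

-- ===== PORT A =====
-- enumeration of A's two counting loops (y and x start at -1, incremented before use):
-- the cells ((y,x), tile) in scan order; exact.
def pvCells (board : List (List Int)) : List ((Int × Int) × Int) :=
  (PySem.List.enumerate board).flatMap (fun yr =>
    (PySem.List.enumerate yr.2).map (fun xt => ((yr.1, xt.1), xt.2)))

-- `if y!=0: if board[y-1][x]==0:` (board reads via pyGet?; in range whenever Python returns)
def pvGuardU (board : List (List Int)) (y x : Int) : Bool :=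
  y != 0 && ((PySem.List.pyGet? board (y-1)).bind (fun row => PySem.List.pyGet? row x) == some 0)

def pvGuardL (board : List (List Int)) (y x : Int) : Bool :=
  x != 0 && ((PySem.List.pyGet? board y).bind (fun row => PySem.List.pyGet? row (x-1)) == some 0)

-- A's first index-hunting loop: `temp=0; for reg in regions: if tgt in reg: region.append(temp) else temp+=1`
def pvScan1 (tgt : Int × Int) (regions : List (List (Int × Int))) (acc : List Nat × Nat) : List Nat × Nat :=
  regions.foldl (fun p reg => if tgt ∈ reg then (p.1 ++ [p.2], p.2) else (p.1, p.2 + 1)) acc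

-- A's second loop, with the `if temp not in region` test
def pvScan2 (tgt : Int × Int) (regions : List (List (Int × Int))) (acc : List Nat × Nat) : List Nat × Nat :=
  regions.foldl (fun p reg =>
    if tgt ∈ reg then (if p.2 ∈ p.1 then p else (p.1 ++ [p.2], p.2)) else (p.1, p.2 + 1)) acc

def pvStepA (board : List (List Int)) (regions : List (List (Int × Int)))
    (c : (Int × Int) × Int) : List (List (Int × Int)) :=
  let y := c.1.1
  let x := c.1.2
  if c.2 == 0 then
    let region : List Nat :=
      if pvGuardU board y x then (pvScan1 (y-1, x) regions ([], 0)).1 else []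
    let region : List Nat :=
      if pvGuardL board y x then (pvScan2 (y, x-1) regions (region, 0)).1 else region
    match region with
    | [] => regions ++ [[(y, x)]]
    | i :: rest =>
      let regions1 := regions.set i (regions.getD i [] ++ [(y, x)])
      match rest with
      | [] => regions1
      | j :: _ =>
        -- regions.pop(j): j < length always holds here, where Python's pop is eraseIdx
        (regions1.set i (regions1.getD i [] ++ regions1.getD j [])).eraseIdx j
  else regions

def findemptyregions (board : List (List Int)) : Bool :=
  ((pvCells board).foldl (pvStepA board) []).all
    (fun reg => PySem.Int.mod (PySem.List.len reg) 4 == 0)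

-- ===== PORT B =====
-- `0 <= ny < len(board) and 0 <= nx < len(board[ny]) and board[ny][nx] == 0`
def pvEmp (board : List (List Int)) (p : Int × Int) : Bool :=
  0 ≤ p.1 && p.1 < (board.length : Int) && 0 ≤ p.2 &&
    p.2 < ((board.getD p.1.toNat []).length : Int) &&
    ((board.getD p.1.toNat []).getD p.2.toNat 1 == 0)

-- the 4-tuple of neighbours, in Python's order
def pvNbrs (p : Int × Int) : List (Int × Int) :=
  [(p.1 - 1, p.2), (p.1 + 1, p.2), (p.1, p.2 - 1), (p.1, p.2 + 1)]

-- the body of B's neighbour loop: mark and push an in-range empty unseen neighbour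
def pvPush (board : List (List Int)) (st : List (Int × Int) × PySem.Set (Int × Int))
    (n : Int × Int) : List (Int × Int) × PySem.Set (Int × Int) :=
  if pvEmp board n && !(PySem.Set.contains st.2 n) then (n :: st.1, PySem.Set.add st.2 n)
  else st

-- `while stack:` — fuel only makes the loop total; it is never exhausted (pvFuel bounds the
-- number of iterations, see pvDFS_spec below)
def pvDFS (board : List (List Int)) :
    Nat → List (Int × Int) → PySem.Set (Int × Int) → Int → PySem.Set (Int × Int) × Int
  | 0, _, seen, size => (seen, size)
  | _ + 1, [], seen, size => (seen, size)
  | fuel + 1, c :: stack, seen, size =>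
      let st := (pvNbrs c).foldl (pvPush board) (stack, seen)
      pvDFS board fuel st.1 st.2 (size + 1)

def pvFuel (board : List (List Int)) : Nat := (board.map List.length).sum + 1

-- B's outer double loop over `enumerate` visits the same cells as A's (pvCells);
-- `none` = `return False` happened
def pvOuterStep (board : List (List Int)) (st : Option (PySem.Set (Int × Int)))
    (c : (Int × Int) × Int) : Option (PySem.Set (Int × Int)) :=
  match st with
  | none => none
  | some seen =>
    if c.2 == 0 && !(PySem.Set.contains seen c.1) then
      let r := pvDFS board (pvFuel board) [c.1] (PySem.Set.add seen c.1) 0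
      if PySem.Int.mod r.2 4 != 0 then none else some r.1
    else some seen

def findemptyregions_alt (board : List (List Int)) : Bool :=
  ((pvCells board).foldl (pvOuterStep board) (some PySem.Set.empty)).isSome

-- ===== PRECONDITION & SPEC =====
-- Pre_ = exactly where Python A returns: A raises IndexError at an empty cell whose row above
-- is too short to hold the same column (ragged boards).
def Pre_findemptyregions (board : List (List Int)) : Prop :=
  ∀ y, y < board.length → ∀ x, x < (board.getD y []).length →
    (board.getD y []).getD x 1 = 0 → (y = 0 ∨ x < (board.getD (y-1) []).length)
instance (board : List (List Int)) : Decidable (Pre_findemptyregions board) := by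
  unfold Pre_findemptyregions; infer_instance

def pvWitness_findemptyregions : List (List Int) := [[0, 0, 1], [0, 0, 2]]

def Spec_findemptyregions (board : List (List Int)) (out : Bool) : Prop := out = findemptyregions_alt board
instance (board : List (List Int)) (out : Bool) : Decidable (Spec_findemptyregions board out) := by unfold Spec_findemptyregions; infer_instance

-- ===== CLAIM (what is proved, stated in full; the proofs are below) =====
def Claim_equal_findemptyregions : Prop := ∀ (board : List (List Int)), Dom_findemptyregions board → Pre_findemptyregions board → Spec_findemptyregions board (findemptyregions board)

-- ===== LEMMAS AND PROOFS =====

-- ===== graph layer =====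
-- orthogonal adjacency of coordinates
def pvAdjC (p q : Int × Int) : Prop :=
  (p.1 = q.1 ∧ (p.2 = q.2 + 1 ∨ q.2 = p.2 + 1)) ∨ (p.2 = q.2 ∧ (p.1 = q.1 + 1 ∨ q.1 = p.1 + 1))

-- edge of the empty-cell graph
def pvAdj (board : List (List Int)) (p q : Int × Int) : Prop :=
  pvEmp board p = true ∧ pvEmp board q = true ∧ pvAdjC p q

-- a step staying inside the cell set S
def pvStepS (board : List (List Int)) (S : List (Int × Int)) (p q : Int × Int) : Prop :=
  pvAdj board p q ∧ p ∈ S ∧ q ∈ S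

-- connectivity inside S / in the whole empty-cell graph
def pvReachIn (board : List (List Int)) (S : List (Int × Int)) : Int × Int → Int × Int → Prop :=
  Relation.ReflTransGen (pvStepS board S)

def pvReach (board : List (List Int)) : Int × Int → Int × Int → Prop :=
  Relation.ReflTransGen (pvAdj board)

theorem pvAdjC_symm {p q : Int × Int} (h : pvAdjC p q) : pvAdjC q p := by
  unfold pvAdjC at *; omega

theorem pvAdjC_irrefl (p : Int × Int) (h : pvAdjC p p) : False := by
  unfold pvAdjC at h; omega

theorem pvAdj_symm {board : List (List Int)} {p q : Int × Int} (h : pvAdj board p q) :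
    pvAdj board q p := ⟨h.2.1, h.1, pvAdjC_symm h.2.2⟩

theorem pvReach_symm {board : List (List Int)} {p q : Int × Int}
    (h : pvReach board p q) : pvReach board q p :=
  Relation.ReflTransGen.symmetric (fun _ _ => pvAdj_symm) h

theorem pvReachIn_symm {board : List (List Int)} {S : List (Int × Int)} {p q : Int × Int}
    (h : pvReachIn board S p q) : pvReachIn board S q p :=
  Relation.ReflTransGen.symmetric (fun _ _ hs => ⟨pvAdj_symm hs.1, hs.2.2, hs.2.1⟩) h

theorem pvReachIn_mono {board : List (List Int)} {S T : List (Int × Int)} (hST : ∀ a ∈ S, a ∈ T)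
    {p q : Int × Int} (h : pvReachIn board S p q) : pvReachIn board T p q :=
  Relation.ReflTransGen.mono (fun _ _ hs => ⟨hs.1, hST _ hs.2.1, hST _ hs.2.2⟩) h

theorem pvReachIn_reach {board : List (List Int)} {S : List (Int × Int)} {p q : Int × Int}
    (h : pvReachIn board S p q) : pvReach board p q :=
  Relation.ReflTransGen.mono (fun _ _ hs => hs.1) h

-- endpoints of a nontrivial ReachIn lie in S
theorem pvReachIn_cases {board : List (List Int)} {S : List (Int × Int)} {p q : Int × Int}
    (h : pvReachIn board S p q) : p = q ∨ (p ∈ S ∧ q ∈ S) := by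
  induction h using Relation.ReflTransGen.head_induction_on with
  | refl => exact Or.inl rfl
  | head hstep _ ih =>
    rcases ih with rfl | ⟨_, hq⟩
    · exact Or.inr ⟨hstep.2.1, hstep.2.2⟩
    · exact Or.inr ⟨hstep.2.1, hq⟩

-- when S holds every empty cell, ReachIn S is plain reachability
theorem pvReach_iff_reachIn {board : List (List Int)} {S : List (Int × Int)}
    (hS : ∀ p, pvEmp board p = true → p ∈ S) {p q : Int × Int} :
    pvReach board p q ↔ pvReachIn board S p q :=
  ⟨Relation.ReflTransGen.mono (fun _ _ hs => ⟨hs, hS _ hs.1, hS _ hs.2.1⟩),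
   pvReachIn_reach⟩

-- membership characterisation of pvEmp
theorem pvEmp_iff {board : List (List Int)} {p : Int × Int} :
    pvEmp board p = true ↔ ∃ (a k : Nat), ∃ (ha : a < board.length),
      p = ((a : Int), (k : Int)) ∧ ∃ (hk : k < (board[a]).length), board[a][k] = 0 := by
  unfold pvEmp
  constructor
  · intro h
    simp only [Bool.and_eq_true, decide_eq_true_eq, beq_iff_eq] at h
    obtain ⟨⟨⟨⟨h1, h2⟩, h3⟩, h4⟩, h5⟩ := h
    refine ⟨p.1.toNat, p.2.toNat, by omega, ?_, ?_⟩
    · ext <;> simp <;> omega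
    · have ha : p.1.toNat < board.length := by omega
      rw [List.getD_eq_getElem board [] ha] at h4 h5
      have hk : p.2.toNat < (board[p.1.toNat]).length := by omega
      rw [List.getD_eq_getElem _ 1 hk] at h5
      exact ⟨hk, h5⟩
  · rintro ⟨a, k, ha, rfl, hk, h0⟩
    simp only [Bool.and_eq_true, decide_eq_true_eq, beq_iff_eq]
    rw [Int.toNat_natCast, Int.toNat_natCast, List.getD_eq_getElem board [] ha,
      List.getD_eq_getElem _ 1 hk]
    refine ⟨⟨⟨⟨by omega, by omega⟩, by omega⟩, by exact_mod_cast hk⟩, h0⟩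

-- ===== the scan order: cells, their zeros, and the per-cell facts =====
theorem pvCells_mem_iff {board : List (List Int)} {pt : (Int × Int) × Int} :
    pt ∈ pvCells board ↔ ∃ (a k : Nat), ∃ (ha : a < board.length),
      ∃ (hk : k < (board[a]).length), pt = (((a : Int), (k : Int)), board[a][k]) := by
  unfold pvCells
  rw [List.mem_flatMap]
  constructor
  · rintro ⟨yr, hyr, hpt⟩
    rw [PySem.List.mem_enumerate_iff] at hyr
    obtain ⟨a, ha, rfl⟩ := hyr
    rw [List.mem_map] at hpt
    obtain ⟨xt, hxt, rfl⟩ := hpt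
    rw [PySem.List.mem_enumerate_iff] at hxt
    obtain ⟨k, hk, rfl⟩ := hxt
    exact ⟨a, k, ha, hk, by simp⟩
  · rintro ⟨a, k, ha, hk, rfl⟩
    refine ⟨((0 : Int) + (a : Int), board[a]), ?_, ?_⟩
    · rw [PySem.List.mem_enumerate_iff]; exact ⟨a, ha, rfl⟩
    · rw [List.mem_map]
      refine ⟨((0 : Int) + (k : Int), board[a][k]), ?_, by simp⟩
      rw [PySem.List.mem_enumerate_iff]; exact ⟨k, hk, rfl⟩

def pvZeros (cs : List ((Int × Int) × Int)) : List (Int × Int) :=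
  cs.filterMap (fun c => if c.2 = 0 then some c.1 else none)

theorem pvZeros_mem {cs : List ((Int × Int) × Int)} {p : Int × Int} :
    p ∈ pvZeros cs ↔ (p, 0) ∈ cs ∨ ∃ t, (p, t) ∈ cs ∧ t = 0 := by
  unfold pvZeros
  rw [List.mem_filterMap]
  constructor
  · rintro ⟨⟨q, t⟩, hq, hif⟩
    by_cases ht : t = 0
    · subst ht
      simp only [if_true, Option.some.injEq] at hif
      subst hif
      exact Or.inl hq
    · rw [if_neg ht] at hif; cases hif
  · rintro (h | ⟨t, ht, rfl⟩)
    · exact ⟨(p, 0), h, by simp⟩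
    · exact ⟨(p, 0), ht, by simp⟩

theorem pvZeros_pvCells_mem {board : List (List Int)} {p : Int × Int} :
    p ∈ pvZeros (pvCells board) ↔ pvEmp board p = true := by
  rw [pvZeros_mem, pvEmp_iff]
  constructor
  · rintro (h | ⟨t, ht, rfl⟩)
    · rw [pvCells_mem_iff] at h
      obtain ⟨a, k, ha, hk, he⟩ := h
      obtain ⟨he1, he2⟩ := Prod.mk.injEq .. ▸ he
      exact ⟨a, k, ha, he1, hk, he2.symm⟩
    · rw [pvCells_mem_iff] at ht
      obtain ⟨a, k, ha, hk, he⟩ := ht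
      obtain ⟨he1, he2⟩ := Prod.mk.injEq .. ▸ he
      exact ⟨a, k, ha, he1, hk, he2.symm⟩
  · rintro ⟨a, k, ha, rfl, hk, h0⟩
    left
    rw [pvCells_mem_iff]
    exact ⟨a, k, ha, hk, by rw [h0]⟩

-- per-step facts about the scan order: the up/left guards read exactly membership in the
-- already-processed zero cells, and the cell itself / its down & right neighbours are not yet processed
def pvSeqOK (board : List (List Int)) : List (Int × Int) → List ((Int × Int) × Int) → Prop
  | _, [] => True
  | done, c :: cs =>
    (c.2 = 0 → c.1 ∉ done ∧ pvEmp board c.1 = true ∧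
      (pvGuardU board c.1.1 c.1.2 = true ↔ (c.1.1 - 1, c.1.2) ∈ done) ∧
      (pvGuardL board c.1.1 c.1.2 = true ↔ (c.1.1, c.1.2 - 1) ∈ done) ∧
      (c.1.1 + 1, c.1.2) ∉ done ∧ (c.1.1, c.1.2 + 1) ∉ done) ∧
    pvSeqOK board (if c.2 = 0 then done ++ [c.1] else done) cs

def pvRowZeros (y : Int) (row : List Int) : List (Int × Int) :=
  (PySem.List.enumerate row).filterMap (fun xt => if xt.2 = 0 then some (y, xt.1) else none)

def pvDoneUpTo (board : List (List Int)) (n : Nat) : List (Int × Int) :=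
  (PySem.List.enumerate (board.take n)).flatMap (fun yr => pvRowZeros yr.1 yr.2)

theorem pvSeqOK_append (board : List (List Int)) :
    ∀ (cs1 cs2 : List ((Int × Int) × Int)) (done : List (Int × Int)),
    pvSeqOK board done cs1 → pvSeqOK board (done ++ pvZeros cs1) cs2 →
    pvSeqOK board done (cs1 ++ cs2) := by
  intro cs1
  induction cs1 with
  | nil =>
    intro cs2 done _ h2
    simpa [pvZeros] using h2
  | cons c cs ih =>
    intro cs2 done h1 h2
    obtain ⟨hok, hrest⟩ := h1
    refine ⟨hok, ?_⟩
    apply ih cs2 _ hrest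
    have he : done ++ pvZeros (c :: cs)
        = (if c.2 = 0 then done ++ [c.1] else done) ++ pvZeros cs := by
      by_cases hc : c.2 = 0 <;> simp [pvZeros, List.filterMap_cons, hc]
    rw [← he]
    exact h2

theorem pvRowZeros_mem (y : Int) (row : List Int) (p : Int × Int) :
    p ∈ pvRowZeros y row ↔ ∃ k : Nat, ∃ hk : k < row.length, p = (y, (k : Int)) ∧ row[k] = 0 := by
  rw [pvRowZeros, List.mem_filterMap]
  constructor
  · rintro ⟨xt, hxt, hif⟩
    rw [PySem.List.mem_enumerate_iff] at hxt
    obtain ⟨k, hk, rfl⟩ := hxt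
    simp only [zero_add] at hif
    by_cases h : row[k] = 0
    · rw [if_pos h] at hif
      exact ⟨k, hk, (Option.some.inj hif).symm, h⟩
    · rw [if_neg h] at hif
      exact absurd hif (by simp)
  · rintro ⟨k, hk, rfl, h0⟩
    refine ⟨((0 : Int) + (k : Int), row[k]), ?_, ?_⟩
    · rw [PySem.List.mem_enumerate_iff]
      exact ⟨k, hk, rfl⟩
    · simp [h0]

theorem pvDoneUpTo_mem (board : List (List Int)) (n : Nat) (p : Int × Int) :
    p ∈ pvDoneUpTo board n ↔ ∃ a : Nat, ∃ ha : a < n, ∃ hab : a < board.length,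
      ∃ k : Nat, ∃ hk : k < (board[a]).length, p = ((a : Int), (k : Int)) ∧ board[a][k] = 0 := by
  rw [pvDoneUpTo, List.mem_flatMap]
  constructor
  · rintro ⟨yr, hyr, hp⟩
    rw [PySem.List.mem_enumerate_iff] at hyr
    obtain ⟨a, ha, rfl⟩ := hyr
    have ha2 : a < n := by
      rw [List.length_take] at ha
      omega
    have ha3 : a < board.length := by
      rw [List.length_take] at ha
      omega
    simp only [zero_add, List.getElem_take] at hp
    rw [pvRowZeros_mem] at hp
    obtain ⟨k, hk, rfl, h0⟩ := hp
    exact ⟨a, ha2, ha3, k, hk, rfl, h0⟩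
  · rintro ⟨a, ha, hab, k, hk, rfl, h0⟩
    refine ⟨((0 : Int) + (a : Int), board[a]), ?_, ?_⟩
    · rw [PySem.List.mem_enumerate_iff]
      refine ⟨a, by rw [List.length_take]; omega, ?_⟩
      rw [List.getElem_take]
    · rw [pvRowZeros_mem]
      exact ⟨k, hk, by simp, h0⟩

-- the per-cell facts pvSeqOK demands, at cell (n, k)
theorem pvCellOK (board : List (List Int)) (n k : Nat) (hn : n < board.length)
    (hk : k < (board[n]).length) :
    (((n : Int), (k : Int)) ∉ pvDoneUpTo board n ++ pvRowZeros n ((board[n]).take k)) ∧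
    ((board[n][k] = 0) → pvEmp board ((n : Int), (k : Int)) = true) ∧
    (pvGuardU board n k = true ↔
      ((n : Int) - 1, (k : Int)) ∈ pvDoneUpTo board n ++ pvRowZeros n ((board[n]).take k)) ∧
    (pvGuardL board n k = true ↔
      ((n : Int), (k : Int) - 1) ∈ pvDoneUpTo board n ++ pvRowZeros n ((board[n]).take k)) ∧
    (((n : Int) + 1, (k : Int)) ∉ pvDoneUpTo board n ++ pvRowZeros n ((board[n]).take k)) ∧
    (((n : Int), (k : Int) + 1) ∉ pvDoneUpTo board n ++ pvRowZeros n ((board[n]).take k)) := by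
  have hmem : ∀ p : Int × Int, p ∈ pvDoneUpTo board n ++ pvRowZeros n ((board[n]).take k) ↔
      ((∃ a : Nat, ∃ ha : a < n, ∃ hab : a < board.length,
        ∃ k' : Nat, ∃ hk' : k' < (board[a]).length, p = ((a : Int), (k' : Int)) ∧ board[a][k'] = 0)
      ∨ (∃ k' : Nat, ∃ hk' : k' < ((board[n]).take k).length,
        p = ((n : Int), (k' : Int)) ∧ ((board[n]).take k)[k'] = 0)) := by
    intro p
    rw [List.mem_append, pvDoneUpTo_mem, pvRowZeros_mem]
  refine ⟨?_, ?_, ?_, ?_, ?_, ?_⟩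
  · rw [hmem]
    rintro (⟨a, ha, hab, k', hk', hpe, h0⟩ | ⟨k', hk', hpe, h0⟩)
    · rw [Prod.mk.injEq] at hpe
      omega
    · rw [Prod.mk.injEq] at hpe
      rw [List.length_take] at hk'
      omega
  · intro h0
    rw [pvEmp_iff]
    exact ⟨n, k, hn, rfl, hk, h0⟩
  · rw [hmem, pvGuardU]
    rcases n with _ | m
    · simp only [Nat.cast_zero, bne_self_eq_false, Bool.false_and, Bool.false_eq_true,
        false_iff]
      rintro (⟨a, ha, _⟩ | ⟨k', hk', hpe, h0⟩)
      · omega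
      · rw [Prod.mk.injEq] at hpe
        omega
    · have he1 : ((m + 1 : Nat) : Int) - 1 = (m : Int) := by push_cast; ring
      rw [he1]
      have he2 : (((m + 1 : Nat) : Int) != 0) = true := by
        rw [bne_iff_ne]
        omega
      rw [he2, Bool.true_and, PySem.List.pyGet?_natCast,
        List.getElem?_eq_getElem (by omega : m < board.length)]
      simp only [Option.bind_some]
      rw [PySem.List.pyGet?_natCast]
      constructor
      · intro hb
        rw [beq_iff_eq, List.getElem?_eq_some_iff] at hb
        obtain ⟨hkm, h0⟩ := hb
        exact Or.inl ⟨m, by omega, by omega, k, hkm, rfl, h0⟩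
      · rintro (⟨a, ha, hab, k', hk', hpe, h0⟩ | ⟨k', hk', hpe, h0⟩)
        · rw [Prod.mk.injEq] at hpe
          have ham : a = m := by omega
          have hkk : k' = k := by omega
          subst ham
          subst hkk
          rw [beq_iff_eq, List.getElem?_eq_some_iff]
          exact ⟨hk', h0⟩
        · rw [Prod.mk.injEq] at hpe
          omega
  · rw [hmem, pvGuardL]
    rcases k with _ | j
    · simp only [Nat.cast_zero, bne_self_eq_false, Bool.false_and, Bool.false_eq_true,
        false_iff]
      rintro (⟨a, ha, hab, k', hk', hpe, h0⟩ | ⟨k', hk', hpe, h0⟩)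
      · rw [Prod.mk.injEq] at hpe
        omega
      · rw [Prod.mk.injEq] at hpe
        omega
    · have he1 : ((j + 1 : Nat) : Int) - 1 = (j : Int) := by push_cast; ring
      rw [he1]
      have he2 : (((j + 1 : Nat) : Int) != 0) = true := by
        rw [bne_iff_ne]
        omega
      rw [he2, Bool.true_and, PySem.List.pyGet?_natCast,
        List.getElem?_eq_getElem (by omega : n < board.length)]
      simp only [Option.bind_some]
      rw [PySem.List.pyGet?_natCast]
      constructor
      · intro hb
        rw [beq_iff_eq, List.getElem?_eq_some_iff] at hb
        obtain ⟨hkm, h0⟩ := hb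
        refine Or.inr ⟨j, by rw [List.length_take]; omega, rfl, ?_⟩
        rw [List.getElem_take]
        exact h0
      · rintro (⟨a, ha, hab, k', hk', hpe, h0⟩ | ⟨k', hk', hpe, h0⟩)
        · rw [Prod.mk.injEq] at hpe
          omega
        · rw [Prod.mk.injEq] at hpe
          have hkj : k' = j := by omega
          subst hkj
          rw [List.getElem_take] at h0
          rw [beq_iff_eq, List.getElem?_eq_some_iff]
          exact ⟨by omega, h0⟩
  · rw [hmem]
    rintro (⟨a, ha, hab, k', hk', hpe, h0⟩ | ⟨k', hk', hpe, h0⟩)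
    · rw [Prod.mk.injEq] at hpe
      omega
    · rw [Prod.mk.injEq] at hpe
      omega
  · rw [hmem]
    rintro (⟨a, ha, hab, k', hk', hpe, h0⟩ | ⟨k', hk', hpe, h0⟩)
    · rw [Prod.mk.injEq] at hpe
      omega
    · rw [Prod.mk.injEq] at hpe
      rw [List.length_take] at hk'
      omega

theorem pvSeqRow (board : List (List Int)) (n : Nat) (hn : n < board.length) :
    ∀ (d k : Nat), (board[n]).length - k = d → k ≤ (board[n]).length →
    pvSeqOK board (pvDoneUpTo board n ++ pvRowZeros n ((board[n]).take k))
      ((PySem.List.enumerate ((board[n]).drop k) k).map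
        (fun xt => (((n : Int), xt.1), xt.2))) := by
  intro d
  induction d with
  | zero =>
    intro k hd hk
    have hke : k = (board[n]).length := by omega
    subst hke
    rw [List.drop_length]
    simp [PySem.List.enumerate_nil, pvSeqOK]
  | succ d ih =>
    intro k hd hk
    have hklt : k < (board[n]).length := by omega
    rw [List.drop_eq_getElem_cons hklt, PySem.List.enumerate_cons, List.map_cons]
    obtain ⟨hnot, hemp, hgu, hgl, hdn, hrt⟩ := pvCellOK board n k hn hklt
    refine ⟨fun ht => ⟨hnot, hemp ht, hgu, hgl, hdn, hrt⟩, ?_⟩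
    have hdone : (if ((((n : Int), (k : Int)), (board[n])[k]) : (Int × Int) × Int).2 = 0
        then (pvDoneUpTo board n ++ pvRowZeros n ((board[n]).take k)) ++ [((n : Int), (k : Int))]
        else pvDoneUpTo board n ++ pvRowZeros n ((board[n]).take k))
        = pvDoneUpTo board n ++ pvRowZeros n ((board[n]).take (k + 1)) := by
      have htake : (board[n]).take (k + 1) = (board[n]).take k ++ [(board[n])[k]] := by
        rw [List.take_succ, List.getElem?_eq_getElem hklt]
        rfl
      have hrz : pvRowZeros n ((board[n]).take (k + 1))
          = pvRowZeros n ((board[n]).take k)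
            ++ (if (board[n])[k] = 0 then [((n : Int), (k : Int))] else []) := by
        rw [htake, pvRowZeros, PySem.List.enumerate_append, List.filterMap_append]
        congr 1
        rw [List.length_take, Nat.min_eq_left (le_of_lt hklt)]
        simp only [PySem.List.enumerate_cons, PySem.List.enumerate_nil,
          List.filterMap_cons, List.filterMap_nil]
        by_cases h0 : (board[n])[k] = 0
        · simp [h0]
        · simp [h0]
      by_cases h0 : (board[n])[k] = 0
      · rw [if_pos h0, hrz, if_pos h0, List.append_assoc]
      · rw [if_neg h0, hrz, if_neg h0, List.append_nil]
    rw [hdone]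
    have hcast : ((k : Int) + 1) = ((k + 1 : Nat) : Int) := by push_cast; ring
    rw [hcast]
    exact ih (k + 1) (by omega) (by omega)

theorem pvSeqRows (board : List (List Int)) :
    ∀ (d n : Nat), board.length - n = d → n ≤ board.length →
    pvSeqOK board (pvDoneUpTo board n)
      ((PySem.List.enumerate (board.drop n) n).flatMap (fun yr =>
        (PySem.List.enumerate yr.2).map (fun xt => ((yr.1, xt.1), xt.2)))) := by
  intro d
  induction d with
  | zero =>
    intro n hd hn
    have hne : n = board.length := by omega
    subst hne
    rw [List.drop_length]
    simp [PySem.List.enumerate_nil, pvSeqOK]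
  | succ d ih =>
    intro n hd hn
    have hnlt : n < board.length := by omega
    rw [List.drop_eq_getElem_cons hnlt, PySem.List.enumerate_cons, List.flatMap_cons]
    apply pvSeqOK_append
    · have := pvSeqRow board n hnlt ((board[n]).length) 0 (by omega) (by omega)
      simpa [List.take_zero, pvRowZeros, PySem.List.enumerate_nil] using this
    · have hz : pvZeros ((PySem.List.enumerate (board[n])).map
          (fun xt => ((((n : Int)), xt.1), xt.2))) = pvRowZeros n (board[n]) := by
        rw [pvZeros, pvRowZeros, List.filterMap_map]
        rfl
      have hup : pvDoneUpTo board n ++ pvRowZeros n (board[n]) = pvDoneUpTo board (n + 1) := by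
        rw [pvDoneUpTo, pvDoneUpTo, List.take_succ, List.getElem?_eq_getElem hnlt,
          Option.toList_some, PySem.List.enumerate_append, List.flatMap_append]
        congr 1
        rw [List.length_take, Nat.min_eq_left (le_of_lt hnlt)]
        simp [PySem.List.enumerate_cons, PySem.List.enumerate_nil]
      rw [hz, hup]
      have hcast : ((n : Int) + 1) = ((n + 1 : Nat) : Int) := by push_cast; ring
      rw [hcast]
      exact ih (n + 1) (by omega) (by omega)

theorem pvSeq_main (board : List (List Int)) : pvSeqOK board [] (pvCells board) := by
  have := pvSeqRows board board.length 0 rfl (Nat.zero_le _)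
  simpa [pvCells, pvDoneUpTo, List.take_zero, PySem.List.enumerate_nil] using this

-- ===== adding one cell to the set: how connectivity grows =====
theorem pvReachIn_eq_of_not_mem {board : List (List Int)} {S : List (Int × Int)}
    {p q : Int × Int} (h : pvReachIn board S p q) (hp : p ∉ S) : p = q := by
  rcases pvReachIn_cases h with h | h
  · exact h
  · exact absurd h.1 hp

-- decomposition of a path in S ++ [c]
theorem pvReachIn_snoc {board : List (List Int)} {S : List (Int × Int)} {c : Int × Int}
    (hc : c ∉ S) {a b : Int × Int} (h : pvReachIn board (S ++ [c]) a b) :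
    pvReachIn board S a b ∨
    (∃ n₁, n₁ ∈ S ∧ pvAdj board c n₁ ∧ ∃ n₂, n₂ ∈ S ∧ pvAdj board c n₂ ∧
      pvReachIn board S a n₁ ∧ pvReachIn board S n₂ b) ∨
    (a = c ∧ b = c) ∨
    (a = c ∧ ∃ n, n ∈ S ∧ pvAdj board c n ∧ pvReachIn board S n b) ∨
    (b = c ∧ ∃ n, n ∈ S ∧ pvAdj board c n ∧ pvReachIn board S a n) := by
  induction h using Relation.ReflTransGen.head_induction_on with
  | refl => exact Or.inl Relation.ReflTransGen.refl
  | head hstep _ ih =>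
    obtain ⟨hadj, haS', ha1S'⟩ := hstep
    rename_i a a1 _
    rw [List.mem_append, List.mem_singleton] at haS' ha1S'
    by_cases hac : a = c
    · subst hac
      have ha1S : a1 ∈ S := by
        rcases ha1S' with h | h
        · exact h
        · exact absurd (h ▸ hadj.2.2) (pvAdjC_irrefl a)
      rcases ih with hr | ⟨n₁, hn₁S, hn₁a, n₂, hn₂S, hn₂a, hrn₁, hrn₂⟩ | ⟨h1, h2⟩ |
          ⟨h1, n, hnS, hna, hrn⟩ | ⟨h1, n, hnS, hna, hrn⟩
      · rcases pvReachIn_cases hr with rfl | ⟨h1, _⟩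
        · exact Or.inr (Or.inr (Or.inr (Or.inl ⟨rfl, a1, ha1S, hadj, Relation.ReflTransGen.refl⟩)))
        · exact Or.inr (Or.inr (Or.inr (Or.inl ⟨rfl, a1, ha1S, hadj, hr⟩)))
      · exact Or.inr (Or.inr (Or.inr (Or.inl ⟨rfl, n₂, hn₂S, hn₂a, hrn₂⟩)))
      · exact Or.inr (Or.inr (Or.inl ⟨rfl, h2⟩))
      · exact absurd (h1 ▸ ha1S) hc
      · exact Or.inr (Or.inr (Or.inl ⟨rfl, h1⟩))
    · have haS : a ∈ S := by
        rcases haS' with h | h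
        · exact h
        · exact absurd h hac
      by_cases ha1c : a1 = c
      · subst ha1c
        have hca : pvAdj board a1 a := pvAdj_symm hadj
        rcases ih with hr | ⟨n₁, hn₁S, hn₁a, n₂, hn₂S, hn₂a, hrn₁, hrn₂⟩ | ⟨_, h2⟩ |
            ⟨_, n, hnS, hna, hrn⟩ | ⟨h1, n, hnS, hna, hrn⟩
        · have := pvReachIn_eq_of_not_mem hr hc
          subst this
          exact Or.inr (Or.inr (Or.inr (Or.inr ⟨rfl, a, haS, hca, Relation.ReflTransGen.refl⟩)))
        · have he := pvReachIn_eq_of_not_mem hrn₁ hc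
          exact absurd (by rw [he]; exact hn₁S) hc
        · exact Or.inr (Or.inr (Or.inr (Or.inr ⟨h2, a, haS, hca, Relation.ReflTransGen.refl⟩)))
        · exact Or.inr (Or.inl ⟨a, haS, hca, n, hnS, hna, Relation.ReflTransGen.refl, hrn⟩)
        · have he := pvReachIn_eq_of_not_mem hrn hc
          exact absurd (by rw [he]; exact hnS) hc
      · have ha1S : a1 ∈ S := by
          rcases ha1S' with h | h
          · exact h
          · exact absurd h ha1c
        have hstepS : pvReachIn board S a a1 :=
          Relation.ReflTransGen.single ⟨hadj, haS, ha1S⟩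
        rcases ih with hr | ⟨n₁, hn₁S, hn₁a, n₂, hn₂S, hn₂a, hrn₁, hrn₂⟩ | ⟨h1, h2⟩ |
            ⟨h1, n, hnS, hna, hrn⟩ | ⟨h1, n, hnS, hna, hrn⟩
        · exact Or.inl (hstepS.trans hr)
        · exact Or.inr (Or.inl ⟨n₁, hn₁S, hn₁a, n₂, hn₂S, hn₂a, hstepS.trans hrn₁, hrn₂⟩)
        · exact absurd h1 ha1c
        · exact absurd h1 ha1c
        · exact Or.inr (Or.inr (Or.inr (Or.inr ⟨h1, n, hnS, hna, hstepS.trans hrn⟩)))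

-- ===== the invariant of A's region-building scan =====
def pvInvA (board : List (List Int)) (done : List (Int × Int))
    (regions : List (List (Int × Int))) : Prop :=
  (∀ r ∈ regions, r ≠ [] ∧ r.Nodup) ∧
  (∀ p, p ∈ done ↔ ∃ r ∈ regions, p ∈ r) ∧
  (∀ i j, (hi : i < regions.length) → (hj : j < regions.length) →
    ∀ p, p ∈ regions[i] → p ∈ regions[j] → i = j) ∧
  (∀ i, (hi : i < regions.length) →
    ∀ p q, p ∈ regions[i] → q ∈ regions[i] → pvReachIn board done p q) ∧
  (∀ i j, (hi : i < regions.length) → (hj : j < regions.length) →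
    ∀ p q, p ∈ regions[i] → q ∈ regions[j] → pvReachIn board done p q → i = j) ∧
  (∀ p ∈ done, pvEmp board p = true)

theorem pvLift {board : List (List Int)} {done : List (Int × Int)} {c p q : Int × Int}
    (h : pvReachIn board done p q) : pvReachIn board (done ++ [c]) p q :=
  pvReachIn_mono (fun _ ha => List.mem_append_left _ ha) h

theorem pvStepToC {board : List (List Int)} {done : List (Int × Int)} {c n : Int × Int}
    (hn : n ∈ done) (hadj : pvAdj board c n) : pvReachIn board (done ++ [c]) c n :=
  Relation.ReflTransGen.single
    ⟨hadj, List.mem_append_right _ (List.mem_singleton.mpr rfl), List.mem_append_left _ hn⟩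

-- c joins as an isolated new region
theorem pvInvA_new {board : List (List Int)} {done : List (Int × Int)}
    {regions : List (List (Int × Int))} {c : Int × Int}
    (hinv : pvInvA board done regions) (hc : c ∉ done) (hemp : pvEmp board c = true)
    (HN : ∀ d ∈ done, ¬ pvAdj board c d) :
    pvInvA board (done ++ [c]) (regions ++ [[c]]) := by
  obtain ⟨A1, A2, A3, A4, A5, A6⟩ := hinv
  have hcr : ∀ r ∈ regions, c ∉ r := fun r hr hcr => hc ((A2 c).mpr ⟨r, hr, hcr⟩)
  have hA3' : ∀ i j, (hi : i < (regions ++ [[c]]).length) → (hj : j < (regions ++ [[c]]).length) →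
      ∀ p, p ∈ (regions ++ [[c]])[i] → p ∈ (regions ++ [[c]])[j] → i = j := by
    intro i j hi hj p hpi hpj
    simp only [List.length_append, List.length_singleton] at hi hj
    by_cases hi' : i < regions.length <;> by_cases hj' : j < regions.length
    · rw [List.getElem_append_left hi'] at hpi
      rw [List.getElem_append_left hj'] at hpj
      exact A3 i j hi' hj' p hpi hpj
    · have hje : j = regions.length := by omega
      subst hje
      rw [List.getElem_append_left hi'] at hpi
      rw [List.getElem_concat_length rfl (by simp)] at hpj
      exact absurd ((List.mem_singleton.mp hpj) ▸ hpi) (hcr _ (List.getElem_mem _))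
    · have hie : i = regions.length := by omega
      subst hie
      rw [List.getElem_append_left hj'] at hpj
      rw [List.getElem_concat_length rfl (by simp)] at hpi
      exact absurd ((List.mem_singleton.mp hpi) ▸ hpj) (hcr _ (List.getElem_mem _))
    · omega
  refine ⟨?_, ?_, hA3', ?_, ?_, ?_⟩
  · intro r hr
    rcases List.mem_append.mp hr with h | h
    · exact A1 r h
    · rw [List.mem_singleton] at h
      subst h
      exact ⟨by simp, List.nodup_singleton c⟩
  · intro p
    rw [List.mem_append, List.mem_singleton, A2]
    constructor
    · rintro (⟨r, hr, hp⟩ | hpc)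
      · exact ⟨r, List.mem_append_left _ hr, hp⟩
      · exact ⟨[c], List.mem_append_right _ (by simp), by rw [hpc]; simp⟩
    · rintro ⟨r, hr, hp⟩
      rcases List.mem_append.mp hr with h | h
      · exact Or.inl ⟨r, h, hp⟩
      · rw [List.mem_singleton] at h
        subst h
        exact Or.inr (List.mem_singleton.mp hp)
  · intro i hi p q hpi hqi
    simp only [List.length_append, List.length_singleton] at hi
    by_cases hi' : i < regions.length
    · rw [List.getElem_append_left hi'] at hpi hqi
      exact pvLift (A4 i hi' p q hpi hqi)
    · have hie : i = regions.length := by omega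
      subst hie
      rw [List.getElem_concat_length rfl (by simp)] at hpi hqi
      rw [List.mem_singleton.mp hpi, List.mem_singleton.mp hqi]
      exact Relation.ReflTransGen.refl
  · intro i j hi hj p q hpi hpj hreach
    simp only [List.length_append, List.length_singleton] at hi hj
    rcases pvReachIn_snoc hc hreach with hr | ⟨n₁, hn₁S, hn₁a, _, _, _, _, _⟩ | ⟨h1, h2⟩ |
        ⟨h1, n, hnS, hna, _⟩ | ⟨h1, n, hnS, hna, _⟩
    · -- path inside done: both endpoints are old members, or p = q
      rcases pvReachIn_cases hr with rfl | ⟨hpd, hqd⟩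
      · exact hA3' i j (by simpa using hi) (by simpa using hj) p hpi hpj
      · by_cases hi' : i < regions.length <;> by_cases hj' : j < regions.length
        · rw [List.getElem_append_left hi'] at hpi
          rw [List.getElem_append_left hj'] at hpj
          exact A5 i j hi' hj' p q hpi hpj hr
        · have hje : j = regions.length := by omega
          subst hje
          rw [List.getElem_concat_length rfl (by simp)] at hpj
          exact absurd ((List.mem_singleton.mp hpj) ▸ hqd) hc
        · have hie : i = regions.length := by omega
          subst hie
          rw [List.getElem_concat_length rfl (by simp)] at hpi
          exact absurd ((List.mem_singleton.mp hpi) ▸ hpd) hc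
        · omega
    · exact absurd hn₁a (HN n₁ hn₁S)
    · -- p = c and q = c: both in the last slot
      have hpl : ∀ m, (hm : m < regions.length + 1) →
          c ∈ (regions ++ [[c]])[m]'(by simpa using hm) → m = regions.length := by
        intro m hm hcm
        by_cases hm' : m < regions.length
        · rw [List.getElem_append_left hm'] at hcm
          exact absurd hcm (hcr _ (List.getElem_mem _))
        · omega
      rw [hpl i hi (h1 ▸ hpi), hpl j hj (h2 ▸ hpj)]
    · exact absurd hna (HN n hnS)
    · exact absurd hna (HN n hnS)
  · intro p hp
    rcases List.mem_append.mp hp with h | h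
    · exact A6 p h
    · rw [List.mem_singleton.mp h]
      exact hemp

-- c joins the single adjacent region i0
theorem pvInvA_join {board : List (List Int)} {done : List (Int × Int)}
    {regions : List (List (Int × Int))} {c : Int × Int} {i0 : Nat}
    (hinv : pvInvA board done regions) (hc : c ∉ done) (hemp : pvEmp board c = true)
    (hi0 : i0 < regions.length)
    (hall : ∀ d ∈ done, pvAdj board c d → d ∈ regions[i0])
    (hex : ∃ n, n ∈ done ∧ pvAdj board c n ∧ n ∈ regions[i0]) :
    pvInvA board (done ++ [c]) (regions.set i0 (regions[i0] ++ [c])) := by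
  obtain ⟨A1, A2, A3, A4, A5, A6⟩ := hinv
  have hcr : ∀ r ∈ regions, c ∉ r := fun r hr hcr => hc ((A2 c).mpr ⟨r, hr, hcr⟩)
  set X := regions[i0] ++ [c] with hX
  set R' := regions.set i0 X with hR'
  have hlen : R'.length = regions.length := List.length_set ..
  have hget : ∀ k, (hk : k < regions.length) →
      R'[k]'(by omega) = if i0 = k then X else regions[k] := by
    intro k hk
    simp only [hR', List.getElem_set]
  -- a member of the new slot k is an old member of slot k, unless it is c
  have hmem_old : ∀ k, (hk : k < regions.length) → ∀ p, p ∈ R'[k]'(by omega) → p ≠ c →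
      p ∈ regions[k] := by
    intro k hk p hp hpc
    by_cases h : i0 = k
    · subst h
      rw [hget i0 hi0, if_pos rfl] at hp
      rcases List.mem_append.mp hp with h2 | h2
      · exact h2
      · exact absurd (List.mem_singleton.mp h2) hpc
    · rw [hget k hk, if_neg h] at hp
      exact hp
  have hc_slot : ∀ k, (hk : k < regions.length) → c ∈ R'[k]'(by omega) → k = i0 := by
    intro k hk hck
    by_contra h
    rw [hget k hk, if_neg (fun he => h he.symm)] at hck
    exact hcr _ (List.getElem_mem _) hck
  have hreach_cX : ∀ x ∈ X, pvReachIn board (done ++ [c]) c x := by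
    intro x hx
    rcases List.mem_append.mp hx with h | h
    · obtain ⟨n, hnd, hna, hni⟩ := hex
      exact (pvStepToC hnd hna).trans (pvLift (A4 i0 hi0 n x hni h))
    · rw [List.mem_singleton.mp h]
      exact Relation.ReflTransGen.refl
  have hA3' : ∀ i j, (hi : i < R'.length) → (hj : j < R'.length) →
      ∀ p, p ∈ R'[i] → p ∈ R'[j] → i = j := by
    intro i j hi hj p hpi hpj
    by_cases hpc : p = c
    · rw [hc_slot i (by omega) (hpc ▸ hpi), hc_slot j (by omega) (hpc ▸ hpj)]
    · exact A3 i j (by omega) (by omega) p (hmem_old i (by omega) p hpi hpc)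
        (hmem_old j (by omega) p hpj hpc)
  have hend : ∀ k, (hk : k < R'.length) → ∀ p n, p ∈ R'[k] → n ∈ done →
      pvAdj board c n → pvReachIn board done p n → k = i0 := by
    intro k hk p n hpk hnd hna hrn
    have hni0 : n ∈ regions[i0] := hall n hnd hna
    rcases pvReachIn_cases hrn with rfl | ⟨hpd, _⟩
    · exact A3 k i0 (by omega) hi0 p (hmem_old k (by omega) p hpk (fun he => hc (he ▸ hnd))) hni0
    · exact A5 k i0 (by omega) hi0 p n (hmem_old k (by omega) p hpk (fun he => hc (he ▸ hpd))) hni0 hrn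
  refine ⟨?_, ?_, hA3', ?_, ?_, ?_⟩
  · intro r hr
    obtain ⟨k, hk, rfl⟩ := List.getElem_of_mem hr
    simp only [hR', List.getElem_set]
    by_cases h : i0 = k
    · rw [if_pos h]
      refine ⟨by simp [hX], ?_⟩
      exact ((A1 _ (List.getElem_mem _)).2).append (List.nodup_singleton c)
        (fun a ha hb => (List.mem_singleton.mp hb ▸ hcr _ (List.getElem_mem _)) ha)
    · rw [if_neg h]
      exact A1 _ (List.getElem_mem _)
  · intro p
    constructor
    · intro hp
      rcases List.mem_append.mp hp with h | h
      · obtain ⟨r, hr, hpr⟩ := (A2 p).mp h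
        obtain ⟨k, hk, rfl⟩ := List.getElem_of_mem hr
        refine ⟨R'[k]'(by omega), List.getElem_mem _, ?_⟩
        rw [hget k hk]
        by_cases hki : i0 = k
        · subst hki
          rw [if_pos rfl]
          exact List.mem_append_left _ hpr
        · rwa [if_neg hki]
      · refine ⟨R'[i0]'(by omega), List.getElem_mem _, ?_⟩
        rw [hget i0 hi0, if_pos rfl, List.mem_singleton.mp h]
        exact List.mem_append_right _ (by simp)
    · rintro ⟨r, hr, hpr⟩
      obtain ⟨k, hk, rfl⟩ := List.getElem_of_mem hr
      by_cases hpc : p = c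
      · exact List.mem_append_right _ (by simp [hpc])
      · exact List.mem_append_left _ ((A2 p).mpr
          ⟨regions[k]'(by omega), List.getElem_mem _, hmem_old k (by omega) p hpr hpc⟩)
  · intro i hi p q hpi hqi
    rw [hget i (by omega)] at hpi hqi
    by_cases h : i0 = i
    · rw [if_pos h] at hpi hqi
      exact (pvReachIn_symm (hreach_cX p hpi)).trans (hreach_cX q hqi)
    · rw [if_neg h] at hpi hqi
      exact pvLift (A4 i (by omega) p q hpi hqi)
  · intro i j hi hj p q hpi hpj hreach
    rcases pvReachIn_snoc hc hreach with hr | ⟨n₁, hn₁S, hn₁a, n₂, hn₂S, hn₂a, hrn₁, hrn₂⟩ |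
        ⟨h1, h2⟩ | ⟨h1, n, hnS, hna, hrn⟩ | ⟨h1, n, hnS, hna, hrn⟩
    · rcases pvReachIn_cases hr with rfl | ⟨hpd, hqd⟩
      · exact hA3' i j hi hj p hpi hpj
      · exact A5 i j (by omega) (by omega) p q
          (hmem_old i (by omega) p hpi (fun he => hc (he ▸ hpd)))
          (hmem_old j (by omega) q hpj (fun he => hc (he ▸ hqd))) hr
    · rw [hend i hi p n₁ hpi hn₁S hn₁a hrn₁,
        hend j hj q n₂ hpj hn₂S hn₂a (pvReachIn_symm hrn₂)]
    · rw [hc_slot i (by omega) (h1 ▸ hpi), hc_slot j (by omega) (h2 ▸ hpj)]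
    · rw [hc_slot i (by omega) (h1 ▸ hpi),
        hend j hj q n hpj hnS hna (pvReachIn_symm hrn)]
    · rw [hend i hi p n hpi hnS hna hrn, hc_slot j (by omega) (h1 ▸ hpj)]
  · intro p hp
    rcases List.mem_append.mp hp with h | h
    · exact A6 p h
    · rw [List.mem_singleton.mp h]
      exact hemp

-- index map from slots after `eraseIdx j0` back to original slots
def pvKap (j0 k : Nat) : Nat := if k < j0 then k else k + 1

theorem pvKap_ne (j0 k : Nat) : pvKap j0 k ≠ j0 := by
  unfold pvKap; split <;> omega

theorem pvKap_inj {j0 k1 k2 : Nat} (h : pvKap j0 k1 = pvKap j0 k2) : k1 = k2 := by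
  unfold pvKap at h; split at h <;> split at h <;> omega

-- c merges the two distinct adjacent regions i0 and j0
theorem pvInvA_merge {board : List (List Int)} {done : List (Int × Int)}
    {regions : List (List (Int × Int))} {c : Int × Int} {i0 j0 : Nat}
    (hinv : pvInvA board done regions) (hc : c ∉ done) (hemp : pvEmp board c = true)
    (hi0 : i0 < regions.length) (hj0 : j0 < regions.length) (hne : i0 ≠ j0)
    (hallm : ∀ d ∈ done, pvAdj board c d → d ∈ regions[i0] ∨ d ∈ regions[j0])
    (hexi : ∃ n, n ∈ done ∧ pvAdj board c n ∧ n ∈ regions[i0])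
    (hexj : ∃ n, n ∈ done ∧ pvAdj board c n ∧ n ∈ regions[j0]) :
    pvInvA board (done ++ [c])
      ((regions.set i0 ((regions[i0] ++ [c]) ++ regions[j0])).eraseIdx j0) := by
  obtain ⟨A1, A2, A3, A4, A5, A6⟩ := hinv
  have hcr : ∀ r ∈ regions, c ∉ r := fun r hr hcr => hc ((A2 c).mpr ⟨r, hr, hcr⟩)
  set X := (regions[i0] ++ [c]) ++ regions[j0] with hX
  set R' := (regions.set i0 X).eraseIdx j0 with hR'
  have hlen : R'.length = regions.length - 1 := by
    rw [hR', List.length_eraseIdx, List.length_set, if_pos (by omega)]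
  have hκlt : ∀ k, k < regions.length - 1 → pvKap j0 k < regions.length := by
    intro k hk; unfold pvKap; split <;> omega
  have hgetD : ∀ k, k < regions.length - 1 →
      R'.getD k [] = if pvKap j0 k = i0 then X else regions.getD (pvKap j0 k) [] := by
    intro k hk
    rw [hR', List.getD_eq_getElem _ []
      (by rw [List.length_eraseIdx, List.length_set, if_pos (by omega)]; omega),
      List.getElem_eraseIdx]
    unfold pvKap
    by_cases hkj : k < j0
    · rw [dif_pos hkj, List.getElem_set, if_pos hkj]
      by_cases hki : i0 = k
      · rw [if_pos hki, if_pos hki.symm]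
      · rw [if_neg hki, if_neg (fun h : k = i0 => hki h.symm),
          List.getD_eq_getElem regions [] (by omega : k < regions.length)]
    · rw [dif_neg hkj, List.getElem_set, if_neg hkj]
      by_cases hki : i0 = k + 1
      · rw [if_pos hki, if_pos hki.symm]
      · rw [if_neg hki, if_neg (fun h : k + 1 = i0 => hki h.symm),
          List.getD_eq_getElem regions [] (by omega : k + 1 < regions.length)]
  have hmemR : ∀ k, (hk : k < R'.length) → ∀ p, p ∈ R'[k] ↔ p ∈ R'.getD k [] := by
    intro k hk p
    rw [List.getD_eq_getElem _ [] hk]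
  have hXiff : ∀ p, p ∈ X ↔ (p ∈ regions[i0] ∨ p ∈ regions[j0]) ∨ p = c := by
    intro p
    rw [hX]
    simp only [List.mem_append, List.mem_singleton]
    tauto
  -- X slot exists
  have hk0 : ∃ k0, k0 < regions.length - 1 ∧ pvKap j0 k0 = i0 := by
    by_cases h : i0 < j0
    · exact ⟨i0, by omega, by unfold pvKap; rw [if_pos h]⟩
    · exact ⟨i0 - 1, by omega, by unfold pvKap; rw [if_neg (by omega)]; omega⟩
  -- members of a slot, c-free, are members of an original region
  have hOld : ∀ k, (hk : k < R'.length) → ∀ p, p ∈ R'[k] → p ≠ c →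
      ∃ m, ∃ hm : m < regions.length, p ∈ regions[m] ∧
        (pvKap j0 k = i0 → (m = i0 ∨ m = j0)) ∧ (pvKap j0 k ≠ i0 → m = pvKap j0 k) := by
    intro k hk p hp hpc
    rw [hmemR k hk, hgetD k (by omega)] at hp
    by_cases h : pvKap j0 k = i0
    · rw [if_pos h] at hp
      rcases (hXiff p).mp hp with h2 | h2
      · rcases h2 with h3 | h3
        · exact ⟨i0, hi0, h3, fun _ => Or.inl rfl, fun hn => absurd h hn⟩
        · exact ⟨j0, hj0, h3, fun _ => Or.inr rfl, fun hn => absurd h hn⟩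
      · exact absurd h2 hpc
    · rw [if_neg h, List.getD_eq_getElem regions [] (hκlt k (by omega))] at hp
      exact ⟨pvKap j0 k, hκlt k (by omega), hp, fun h2 => absurd h2 h, fun _ => rfl⟩
  have hc_slot : ∀ k, (hk : k < R'.length) → c ∈ R'[k] → pvKap j0 k = i0 := by
    intro k hk hck
    by_contra h
    rw [hmemR k hk, hgetD k (by omega), if_neg h,
      List.getD_eq_getElem regions [] (hκlt k (by omega))] at hck
    exact hcr _ (List.getElem_mem _) hck
  have hreach_cX : ∀ x ∈ X, pvReachIn board (done ++ [c]) c x := by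
    intro x hx
    rcases (hXiff x).mp hx with h | h
    · rcases h with h2 | h2
      · obtain ⟨n, hnd, hna, hni⟩ := hexi
        exact (pvStepToC hnd hna).trans (pvLift (A4 i0 hi0 n x hni h2))
      · obtain ⟨n, hnd, hna, hni⟩ := hexj
        exact (pvStepToC hnd hna).trans (pvLift (A4 j0 hj0 n x hni h2))
    · rw [h]
      exact Relation.ReflTransGen.refl
  -- a path inside `done` pins the slot of its start to the slot of its adjacent target
  have hendM : ∀ k, (hk : k < R'.length) → ∀ p n, p ∈ R'[k] → n ∈ done →
      pvAdj board c n → pvReachIn board done p n → pvKap j0 k = i0 := by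
    intro k hk p n hpk hnd hna hrn
    by_cases hki : pvKap j0 k = i0
    · exact hki
    · exfalso
      have hpd : p ∈ done := by
        rcases pvReachIn_cases hrn with rfl | ⟨h1, _⟩
        · exact hnd
        · exact h1
      obtain ⟨m, hm, hpm, _, hm2⟩ := hOld k hk p hpk (fun he => hc (he ▸ hpd))
      have hmk : m = pvKap j0 k := hm2 hki
      rcases hallm n hnd hna with h2 | h2
      · have hmi := A5 m i0 hm hi0 p n hpm h2 hrn
        exact hki (by omega)
      · have hmj := A5 m j0 hm hj0 p n hpm h2 hrn
        exact (pvKap_ne j0 k) (by omega)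
  have hconc : ∀ (i j : Nat), i < R'.length → j < R'.length → ∀ m1 m2 : Nat, m1 = m2 →
      ((pvKap j0 i = i0 → (m1 = i0 ∨ m1 = j0)) ∧ (pvKap j0 i ≠ i0 → m1 = pvKap j0 i)) →
      ((pvKap j0 j = i0 → (m2 = i0 ∨ m2 = j0)) ∧ (pvKap j0 j ≠ i0 → m2 = pvKap j0 j)) →
      i = j := by
    rintro i j hi hj m1 m2 h12 ⟨hXi, hOi⟩ ⟨hXj, hOj⟩
    apply pvKap_inj (j0 := j0)
    by_cases h1 : pvKap j0 i = i0 <;> by_cases h2 : pvKap j0 j = i0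
    · rw [h1, h2]
    · have e1 := hXi h1
      have e2 := hOj h2
      have e3 := pvKap_ne j0 j
      omega
    · have e1 := hXj h2
      have e2 := hOi h1
      have e3 := pvKap_ne j0 i
      omega
    · have e1 := hOi h1
      have e2 := hOj h2
      rw [← e1, ← e2]
      exact h12
  have hA3' : ∀ i j, (hi : i < R'.length) → (hj : j < R'.length) →
      ∀ p, p ∈ R'[i] → p ∈ R'[j] → i = j := by
    intro i j hi hj p hpi hpj
    by_cases hpc : p = c
    · subst hpc
      exact pvKap_inj ((hc_slot i hi hpi).trans (hc_slot j hj hpj).symm)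
    · obtain ⟨m1, hm1, hpm1, hXi, hOi⟩ := hOld i hi p hpi hpc
      obtain ⟨m2, hm2, hpm2, hXj, hOj⟩ := hOld j hj p hpj hpc
      exact hconc i j hi hj m1 m2 (A3 m1 m2 hm1 hm2 p hpm1 hpm2) ⟨hXi, hOi⟩ ⟨hXj, hOj⟩
  refine ⟨?_, ?_, hA3', ?_, ?_, ?_⟩
  · intro r hr
    obtain ⟨k, hk, rfl⟩ := List.getElem_of_mem hr
    have he : R'[k] = R'.getD k [] := (List.getD_eq_getElem _ [] hk).symm
    rw [he, hgetD k (by omega)]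
    by_cases h : pvKap j0 k = i0
    · rw [if_pos h]
      refine ⟨by simp [hX], ?_⟩
      have hdisj_ij : ∀ a ∈ regions[i0], a ∉ regions[j0] :=
        fun a ha hb => hne (A3 i0 j0 hi0 hj0 a ha hb)
      have n1 : (regions[i0] ++ [c]).Nodup :=
        ((A1 _ (List.getElem_mem _)).2).append (List.nodup_singleton c)
          (fun a ha hb => (List.mem_singleton.mp hb ▸ hcr _ (List.getElem_mem _)) ha)
      apply n1.append ((A1 _ (List.getElem_mem _)).2)
      intro a ha hb
      rcases List.mem_append.mp ha with h2 | h2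
      · exact hdisj_ij a h2 hb
      · exact (hcr _ (List.getElem_mem _)) ((List.mem_singleton.mp h2) ▸ hb)
    · rw [if_neg h, List.getD_eq_getElem regions [] (hκlt k (by omega))]
      exact A1 _ (List.getElem_mem _)
  · intro p
    constructor
    · intro hp
      rcases List.mem_append.mp hp with h | h
      · obtain ⟨r, hr, hpr⟩ := (A2 p).mp h
        obtain ⟨m, hm, rfl⟩ := List.getElem_of_mem hr
        by_cases hmj : m = j0
        · subst hmj
          obtain ⟨k0, hk0lt, hκ0⟩ := hk0
          refine ⟨R'[k0]'(by omega), List.getElem_mem _, ?_⟩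
          rw [hmemR k0 (by omega), hgetD k0 hk0lt, if_pos hκ0]
          exact (hXiff p).mpr (Or.inl (Or.inr hpr))
        · by_cases hmi : m = i0
          · subst hmi
            obtain ⟨k0, hk0lt, hκ0⟩ := hk0
            refine ⟨R'[k0]'(by omega), List.getElem_mem _, ?_⟩
            rw [hmemR k0 (by omega), hgetD k0 hk0lt, if_pos hκ0]
            exact (hXiff p).mpr (Or.inl (Or.inl hpr))
          · have hkm : pvKap j0 (if m < j0 then m else m - 1) = m := by
              unfold pvKap
              by_cases h2 : m < j0
              · rw [if_pos h2, if_pos h2]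
              · rw [if_neg h2, if_neg (by omega)]
                omega
            have hklt : (if m < j0 then m else m - 1) < regions.length - 1 := by
              split <;> omega
            refine ⟨R'[(if m < j0 then m else m - 1)]'(by omega), List.getElem_mem _, ?_⟩
            rw [hmemR _ (by omega), hgetD _ hklt, hkm, if_neg hmi,
              List.getD_eq_getElem regions [] hm]
            exact hpr
      · obtain ⟨k0, hk0lt, hκ0⟩ := hk0
        refine ⟨R'[k0]'(by omega), List.getElem_mem _, ?_⟩
        rw [hmemR k0 (by omega), hgetD k0 hk0lt, if_pos hκ0]
        exact (hXiff p).mpr (Or.inr (List.mem_singleton.mp h))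
    · rintro ⟨r, hr, hpr⟩
      obtain ⟨k, hk, rfl⟩ := List.getElem_of_mem hr
      by_cases hpc : p = c
      · exact List.mem_append_right _ (by simp [hpc])
      · obtain ⟨m, hm, hpm, _, _⟩ := hOld k hk p hpr hpc
        exact List.mem_append_left _ ((A2 p).mpr ⟨regions[m]'hm, List.getElem_mem _, hpm⟩)
  · intro i hi p q hpi hqi
    by_cases h : pvKap j0 i = i0
    · rw [hmemR i hi, hgetD i (by omega), if_pos h] at hpi hqi
      exact (pvReachIn_symm (hreach_cX p hpi)).trans (hreach_cX q hqi)
    · rw [hmemR i hi, hgetD i (by omega), if_neg h,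
        List.getD_eq_getElem regions [] (hκlt i (by omega))] at hpi hqi
      exact pvLift (A4 (pvKap j0 i) (hκlt i (by omega)) p q hpi hqi)
  · intro i j hi hj p q hpi hpj hreach
    rcases pvReachIn_snoc hc hreach with hr | ⟨n₁, hn₁S, hn₁a, n₂, hn₂S, hn₂a, hrn₁, hrn₂⟩ |
        ⟨h1, h2⟩ | ⟨h1, n, hnS, hna, hrn⟩ | ⟨h1, n, hnS, hna, hrn⟩
    · rcases pvReachIn_cases hr with rfl | ⟨hpd, hqd⟩
      · exact hA3' i j hi hj p hpi hpj
      · obtain ⟨m1, hm1, hpm1, hXi, hOi⟩ := hOld i hi p hpi (fun he => hc (he ▸ hpd))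
        obtain ⟨m2, hm2, hpm2, hXj, hOj⟩ := hOld j hj q hpj (fun he => hc (he ▸ hqd))
        exact hconc i j hi hj m1 m2 (A5 m1 m2 hm1 hm2 p q hpm1 hpm2 hr) ⟨hXi, hOi⟩ ⟨hXj, hOj⟩
    · exact pvKap_inj ((hendM i hi p n₁ hpi hn₁S hn₁a hrn₁).trans
        (hendM j hj q n₂ hpj hn₂S hn₂a (pvReachIn_symm hrn₂)).symm)
    · exact pvKap_inj ((hc_slot i hi (h1 ▸ hpi)).trans (hc_slot j hj (h2 ▸ hpj)).symm)
    · exact pvKap_inj ((hc_slot i hi (h1 ▸ hpi)).trans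
        (hendM j hj q n hpj hnS hna (pvReachIn_symm hrn)).symm)
    · exact pvKap_inj ((hendM i hi p n hpi hnS hna hrn).trans
        (hc_slot j hj (h1 ▸ hpj)).symm)
  · intro p hp
    rcases List.mem_append.mp hp with h | h
    · exact A6 p h
    · rw [List.mem_singleton.mp h]
      exact hemp

-- ---- scan lemmas: A's index-hunting loops return exactly the index of the containing region ----
theorem pvScan1_none (tgt : Int × Int) : ∀ (pre : List (List (Int × Int))) (acc : List Nat × Nat),
    (∀ reg ∈ pre, tgt ∉ reg) → pvScan1 tgt pre acc = (acc.1, acc.2 + pre.length) := by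
  intro pre
  induction pre with
  | nil => simp [pvScan1]
  | cons hd tl ih =>
    intro acc hmem
    simp only [pvScan1, List.foldl_cons] at *
    rw [if_neg (hmem hd (by simp))]
    rw [ih _ (fun r hr => hmem r (by simp [hr]))]
    simp
    omega

theorem pvScan2_none (tgt : Int × Int) : ∀ (pre : List (List (Int × Int))) (acc : List Nat × Nat),
    (∀ reg ∈ pre, tgt ∉ reg) → pvScan2 tgt pre acc = (acc.1, acc.2 + pre.length) := by
  intro pre
  induction pre with
  | nil => simp [pvScan2]
  | cons hd tl ih =>
    intro acc hmem
    simp only [pvScan2, List.foldl_cons] at *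
    rw [if_neg (hmem hd (by simp))]
    rw [ih _ (fun r hr => hmem r (by simp [hr]))]
    simp
    omega

theorem pvDecomp (regions : List (List (Int × Int))) (i0 : Nat) (hi0 : i0 < regions.length) :
    regions = regions.take i0 ++ regions[i0] :: regions.drop (i0 + 1) := by
  conv_lhs => rw [← List.take_append_drop i0 regions]
  rw [List.drop_eq_getElem_cons hi0]

theorem pvNotMem_take (tgt : Int × Int) (regions : List (List (Int × Int))) (i0 : Nat)
    (hi0 : i0 < regions.length)
    (huniq : ∀ j, (hj : j < regions.length) → tgt ∈ regions[j] → j = i0) :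
    ∀ reg ∈ regions.take i0, tgt ∉ reg := by
  intro reg hreg hmem
  obtain ⟨j, hj, rfl⟩ := List.getElem_of_mem hreg
  have hj' : j < i0 := by rw [List.length_take] at hj; omega
  have := huniq j (by omega) (by rwa [List.getElem_take] at hmem)
  omega

theorem pvNotMem_drop (tgt : Int × Int) (regions : List (List (Int × Int))) (i0 : Nat)
    (hi0 : i0 < regions.length)
    (huniq : ∀ j, (hj : j < regions.length) → tgt ∈ regions[j] → j = i0) :
    ∀ reg ∈ regions.drop (i0 + 1), tgt ∉ reg := by
  intro reg hreg hmem
  obtain ⟨j, hj, rfl⟩ := List.getElem_of_mem hreg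
  rw [List.getElem_drop] at hmem
  have hlen : i0 + 1 + j < regions.length := by
    have := List.length_drop (l := regions) (i := i0 + 1)
    omega
  have := huniq (i0 + 1 + j) hlen hmem
  omega

theorem pvScan1_split (tgt : Int × Int) (l1 l2 : List (List (Int × Int))) (acc : List Nat × Nat) :
    pvScan1 tgt (l1 ++ l2) acc = pvScan1 tgt l2 (pvScan1 tgt l1 acc) := by
  simp [pvScan1, List.foldl_append]

theorem pvScan2_split (tgt : Int × Int) (l1 l2 : List (List (Int × Int))) (acc : List Nat × Nat) :
    pvScan2 tgt (l1 ++ l2) acc = pvScan2 tgt l2 (pvScan2 tgt l1 acc) := by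
  simp [pvScan2, List.foldl_append]

theorem pvScan1_cons (tgt : Int × Int) (r : List (Int × Int)) (l : List (List (Int × Int)))
    (acc : List Nat × Nat) :
    pvScan1 tgt (r :: l) acc =
      pvScan1 tgt l (if tgt ∈ r then (acc.1 ++ [acc.2], acc.2) else (acc.1, acc.2 + 1)) := by
  simp [pvScan1]

theorem pvScan2_cons (tgt : Int × Int) (r : List (Int × Int)) (l : List (List (Int × Int)))
    (acc : List Nat × Nat) :
    pvScan2 tgt (r :: l) acc =
      pvScan2 tgt l (if tgt ∈ r then (if acc.2 ∈ acc.1 then acc else (acc.1 ++ [acc.2], acc.2))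
        else (acc.1, acc.2 + 1)) := by
  simp [pvScan2]

theorem pvScan1_found (tgt : Int × Int) (regions : List (List (Int × Int))) (i0 : Nat)
    (hi0 : i0 < regions.length) (hmem : tgt ∈ regions[i0])
    (huniq : ∀ j, (hj : j < regions.length) → tgt ∈ regions[j] → j = i0) :
    (pvScan1 tgt regions ([], 0)).1 = [i0] := by
  conv_lhs => rw [pvDecomp regions i0 hi0]
  rw [pvScan1_split, pvScan1_none tgt _ _ (pvNotMem_take tgt regions i0 hi0 huniq),
    pvScan1_cons, if_pos hmem, pvScan1_none tgt _ _ (pvNotMem_drop tgt regions i0 hi0 huniq)]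
  simp [List.length_take, Nat.min_eq_left (le_of_lt hi0)]

theorem pvScan2_found (tgt : Int × Int) (regions : List (List (Int × Int))) (i0 : Nat)
    (acc0 : List Nat)
    (hi0 : i0 < regions.length) (hmem : tgt ∈ regions[i0])
    (huniq : ∀ j, (hj : j < regions.length) → tgt ∈ regions[j] → j = i0) :
    (pvScan2 tgt regions (acc0, 0)).1 = if i0 ∈ acc0 then acc0 else acc0 ++ [i0] := by
  conv_lhs => rw [pvDecomp regions i0 hi0]
  rw [pvScan2_split, pvScan2_none tgt _ _ (pvNotMem_take tgt regions i0 hi0 huniq),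
    pvScan2_cons, if_pos hmem, pvScan2_none tgt _ _ (pvNotMem_drop tgt regions i0 hi0 huniq)]
  simp [List.length_take, Nat.min_eq_left (le_of_lt hi0)]
  by_cases h : i0 ∈ acc0 <;> simp [h]

-- one step of A's scan preserves the invariant
theorem pvStepA_inv (board : List (List Int)) {done : List (Int × Int)}
    {regions : List (List (Int × Int))} (c : (Int × Int) × Int)
    (hinv : pvInvA board done regions)
    (hok : c.2 = 0 → c.1 ∉ done ∧ pvEmp board c.1 = true ∧
      (pvGuardU board c.1.1 c.1.2 = true ↔ (c.1.1 - 1, c.1.2) ∈ done) ∧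
      (pvGuardL board c.1.1 c.1.2 = true ↔ (c.1.1, c.1.2 - 1) ∈ done) ∧
      (c.1.1 + 1, c.1.2) ∉ done ∧ (c.1.1, c.1.2 + 1) ∉ done) :
    pvInvA board (if c.2 = 0 then done ++ [c.1] else done) (pvStepA board regions c) := by
  obtain ⟨⟨y, x⟩, t⟩ := c
  by_cases ht : t = 0
  · subst ht
    obtain ⟨hcd, hemp, hgu, hgl, hdn, hrt⟩ := hok rfl
    dsimp only at hcd hemp hgu hgl hdn hrt ⊢
    rw [if_pos rfl]
    obtain ⟨A1, A2, A3, A4, A5, A6⟩ := hinv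
    have hadj_done : ∀ d ∈ done, pvAdj board (y, x) d →
        (d = (y - 1, x) ∧ pvGuardU board y x = true) ∨
        (d = (y, x - 1) ∧ pvGuardL board y x = true) := by
      rintro ⟨d1, d2⟩ hd hadj
      have hC := hadj.2.2
      unfold pvAdjC at hC
      dsimp only at hC
      have hd4 : ((d1, d2) : Int × Int) = (y, x - 1) ∨ ((d1, d2) : Int × Int) = (y, x + 1) ∨
          ((d1, d2) : Int × Int) = (y - 1, x) ∨ ((d1, d2) : Int × Int) = (y + 1, x) := by
        simp only [Prod.mk.injEq]
        omega
      rcases hd4 with h4 | h4 | h4 | h4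
      · exact Or.inr ⟨h4, hgl.mpr (h4 ▸ hd)⟩
      · exact absurd (h4 ▸ hd) hrt
      · exact Or.inl ⟨h4, hgu.mpr (h4 ▸ hd)⟩
      · exact absurd (h4 ▸ hd) hdn
    have hup : pvGuardU board y x = true →
        (y - 1, x) ∈ done ∧ pvAdj board (y, x) (y - 1, x) := by
      intro hg
      have hd := hgu.mp hg
      exact ⟨hd, hemp, A6 _ hd, Or.inr ⟨rfl, Or.inl (show y = (y - 1) + 1 by omega)⟩⟩
    have hleft : pvGuardL board y x = true →
        (y, x - 1) ∈ done ∧ pvAdj board (y, x) (y, x - 1) := by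
      intro hg
      have hd := hgl.mp hg
      exact ⟨hd, hemp, A6 _ hd, Or.inl ⟨rfl, Or.inl (show x = (x - 1) + 1 by omega)⟩⟩
    have hfind : ∀ tgt, tgt ∈ done → ∃ i0, ∃ h : i0 < regions.length, tgt ∈ regions[i0] ∧
        ∀ j, (hj : j < regions.length) → tgt ∈ regions[j] → j = i0 := by
      intro tgt htgt
      obtain ⟨r, hr, htr⟩ := (A2 tgt).mp htgt
      obtain ⟨i0, hi0, rfl⟩ := List.getElem_of_mem hr
      exact ⟨i0, hi0, htr, fun j hj hmem => A3 j i0 hj hi0 tgt hmem htr⟩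
    have hinv' : pvInvA board done regions := ⟨A1, A2, A3, A4, A5, A6⟩
    by_cases hGU : pvGuardU board y x = true
    · obtain ⟨hud, hua⟩ := hup hGU
      obtain ⟨i0, hi0, hucont, huuniq⟩ := hfind _ hud
      have hscan1 := pvScan1_found (y - 1, x) regions i0 hi0 hucont huuniq
      by_cases hGL : pvGuardL board y x = true
      · obtain ⟨hld, hla⟩ := hleft hGL
        obtain ⟨j0, hj0, hlcont, hluniq⟩ := hfind _ hld
        have hscan2 := pvScan2_found (y, x - 1) regions j0 [i0] hj0 hlcont hluniq
        simp only [pvStepA, hGU, hGL, beq_self_eq_true, Bool.false_eq_true, if_false, if_true, reduceIte]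
        rw [hscan1, hscan2]
        by_cases hij : j0 = i0
        · subst hij
          rw [if_pos (List.mem_singleton.mpr rfl)]
          show pvInvA board (done ++ [(y, x)])
            (regions.set j0 (regions.getD j0 [] ++ [(y, x)]))
          rw [List.getD_eq_getElem _ _ hj0]
          exact pvInvA_join hinv' hcd hemp hj0
            (fun d hd hadj => by
              rcases hadj_done d hd hadj with ⟨rfl, _⟩ | ⟨rfl, _⟩
              · exact hucont
              · exact hlcont)
            ⟨(y - 1, x), hud, hua, hucont⟩
        · rw [if_neg (by simpa using hij)]
          show pvInvA board (done ++ [(y, x)])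
            (((regions.set i0 (regions.getD i0 [] ++ [(y, x)])).set i0
              ((regions.set i0 (regions.getD i0 [] ++ [(y, x)])).getD i0 [] ++
                (regions.set i0 (regions.getD i0 [] ++ [(y, x)])).getD j0 [])).eraseIdx j0)
          have e1 : regions.getD i0 [] = regions[i0] := List.getD_eq_getElem _ _ hi0
          rw [e1]
          have e2 : (regions.set i0 (regions[i0] ++ [(y, x)])).getD i0 []
              = regions[i0] ++ [(y, x)] := by
            rw [List.getD_eq_getElem _ [] (by simpa using hi0), List.getElem_set, if_pos rfl]
          have e3 : (regions.set i0 (regions[i0] ++ [(y, x)])).getD j0 []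
              = regions[j0] := by
            rw [List.getD_eq_getElem _ [] (by simpa using hj0), List.getElem_set,
              if_neg (fun h : i0 = j0 => hij h.symm)]
          rw [e2, e3, List.set_set]
          exact pvInvA_merge hinv' hcd hemp hi0 hj0 (fun h => hij h.symm)
            (fun d hd hadj => by
              rcases hadj_done d hd hadj with ⟨rfl, _⟩ | ⟨rfl, _⟩
              · exact Or.inl hucont
              · exact Or.inr hlcont)
            ⟨(y - 1, x), hud, hua, hucont⟩ ⟨(y, x - 1), hld, hla, hlcont⟩
      · have hGL' : pvGuardL board y x = false := by
          rw [Bool.not_eq_true] at hGL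
          exact hGL
        simp only [pvStepA, hGU, hGL', beq_self_eq_true, Bool.false_eq_true, if_false, if_true, reduceIte]
        rw [hscan1]
        show pvInvA board (done ++ [(y, x)])
          (regions.set i0 (regions.getD i0 [] ++ [(y, x)]))
        rw [List.getD_eq_getElem _ _ hi0]
        exact pvInvA_join hinv' hcd hemp hi0
          (fun d hd hadj => by
            rcases hadj_done d hd hadj with ⟨rfl, _⟩ | ⟨rfl, hg⟩
            · exact hucont
            · rw [hg] at hGL'
              cases hGL')
          ⟨(y - 1, x), hud, hua, hucont⟩
    · have hGU' : pvGuardU board y x = false := by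
        rw [Bool.not_eq_true] at hGU
        exact hGU
      by_cases hGL : pvGuardL board y x = true
      · obtain ⟨hld, hla⟩ := hleft hGL
        obtain ⟨j0, hj0, hlcont, hluniq⟩ := hfind _ hld
        have hscan2 := pvScan2_found (y, x - 1) regions j0 [] hj0 hlcont hluniq
        rw [if_neg (by simp), List.nil_append] at hscan2
        simp only [pvStepA, hGU', hGL, beq_self_eq_true, Bool.false_eq_true, if_false, if_true, reduceIte]
        rw [hscan2]
        show pvInvA board (done ++ [(y, x)])
          (regions.set j0 (regions.getD j0 [] ++ [(y, x)]))
        rw [List.getD_eq_getElem _ _ hj0]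
        exact pvInvA_join hinv' hcd hemp hj0
          (fun d hd hadj => by
            rcases hadj_done d hd hadj with ⟨rfl, hg⟩ | ⟨rfl, _⟩
            · rw [hg] at hGU'
              cases hGU'
            · exact hlcont)
          ⟨(y, x - 1), hld, hla, hlcont⟩
      · have hGL' : pvGuardL board y x = false := by
          rw [Bool.not_eq_true] at hGL
          exact hGL
        simp only [pvStepA, hGU', hGL', beq_self_eq_true, Bool.false_eq_true, if_false, if_true, reduceIte]
        show pvInvA board (done ++ [(y, x)]) (regions ++ [[(y, x)]])
        exact pvInvA_new hinv' hcd hemp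
          (fun d hd hadj => by
            rcases hadj_done d hd hadj with ⟨rfl, hg⟩ | ⟨rfl, hg⟩
            · rw [hg] at hGU'
              cases hGU'
            · rw [hg] at hGL'
              cases hGL')
  · rw [if_neg ht]
    have hbt : (t == 0) = false := by simpa using ht
    simp only [pvStepA, hbt, Bool.false_eq_true, if_false]
    exact hinv

-- A's whole scan preserves the invariant
theorem pvSimA (board : List (List Int)) :
    ∀ (cs : List ((Int × Int) × Int)) (done : List (Int × Int))
      (regions : List (List (Int × Int))),
    pvSeqOK board done cs → pvInvA board done regions →
    pvInvA board (done ++ pvZeros cs) (cs.foldl (pvStepA board) regions) := by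
  intro cs
  induction cs with
  | nil =>
    intro done regions _ hinv
    simpa [pvZeros] using hinv
  | cons c cs ih =>
    intro done regions hseq hinv
    obtain ⟨hok, hrest⟩ := hseq
    have hstep := pvStepA_inv board c hinv hok
    have he : done ++ pvZeros (c :: cs)
        = (if c.2 = 0 then done ++ [c.1] else done) ++ pvZeros cs := by
      by_cases hc : c.2 = 0 <;> simp [pvZeros, hc]
    rw [List.foldl_cons, he]
    exact ih _ _ hrest hstep

-- ===== B: the DFS flood fill =====
theorem pvNbrs_iff (p q : Int × Int) : q ∈ pvNbrs p ↔ pvAdjC p q := by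
  obtain ⟨p1, p2⟩ := p
  obtain ⟨q1, q2⟩ := q
  unfold pvNbrs pvAdjC
  simp only [List.mem_cons, List.not_mem_nil, or_false, Prod.mk.injEq]
  omega

theorem pvNodup_length_le {l1 l2 : List (Int × Int)} (h : l1.Nodup)
    (hs : ∀ x ∈ l1, x ∈ l2) : l1.length ≤ l2.length := by
  classical
  have h2 : l1.toFinset ⊆ l2.toFinset := fun a ha => by
    simp only [List.mem_toFinset] at *
    exact hs _ ha
  have h3 := Finset.card_le_card h2
  have h4 : l1.toFinset.card = l1.length := List.toFinset_card_of_nodup h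
  have h5 : l2.toFinset.card ≤ l2.length := l2.toFinset_card_le
  omega

theorem pvAllEmp_len (board : List (List Int)) :
    (pvZeros (pvCells board)).length ≤ (board.map List.length).sum := by
  have h1 : (pvZeros (pvCells board)).length ≤ (pvCells board).length := by
    unfold pvZeros
    exact List.length_filterMap_le _ _
  have h2 : (pvCells board).length = (board.map List.length).sum := by
    unfold pvCells
    rw [List.length_flatMap]
    have : (PySem.List.enumerate board).map
        (fun yr => (((PySem.List.enumerate yr.2).map (fun xt => ((yr.1, xt.1), xt.2))).length))
        = (PySem.List.enumerate board).map (fun yr => yr.2.length) := by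
      apply List.map_congr_left
      intro yr _
      rw [List.length_map, PySem.List.length_enumerate]
    rw [this]
    have h3 : (PySem.List.enumerate board).map (fun yr => yr.2.length)
        = board.map List.length := by
      have := PySem.List.map_snd_enumerate (xs := board) (s := 0)
      calc (PySem.List.enumerate board).map (fun yr => yr.2.length)
          = (((PySem.List.enumerate board).map (·.2)).map List.length) := by
            rw [List.map_map]; rfl
        _ = board.map List.length := by rw [this]
    rw [h3]
  omega

-- the neighbour loop: what gets pushed and marked
theorem pvPushFold (board : List (List Int)) (ns : List (Int × Int)) :
    ∀ (stack : List (Int × Int)) (seen : PySem.Set (Int × Int)),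
    ∃ Nl : List (Int × Int),
      (ns.foldl (pvPush board) (stack, seen)).2 = seen ++ Nl ∧
      (ns.foldl (pvPush board) (stack, seen)).1 = Nl.reverse ++ stack ∧
      Nl.Nodup ∧
      (∀ n ∈ Nl, n ∈ ns ∧ pvEmp board n = true ∧ n ∉ seen) ∧
      (∀ q ∈ ns, pvEmp board q = true → q ∈ (ns.foldl (pvPush board) (stack, seen)).2) := by
  induction ns with
  | nil =>
    intro stack seen
    exact ⟨[], by simp, by simp, List.nodup_nil, by simp, by simp⟩
  | cons n ns ih =>
    intro stack seen
    rw [List.foldl_cons]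
    by_cases hcond : (pvEmp board n && !(PySem.Set.contains seen n)) = true
    · have hempn : pvEmp board n = true := by
        simp only [Bool.and_eq_true] at hcond
        exact hcond.1
      have hnot : n ∉ seen := by
        simp only [Bool.and_eq_true, Bool.not_eq_true'] at hcond
        intro hmem
        rw [← PySem.Set.contains_iff seen n] at hmem
        rw [hcond.2] at hmem
        cases hmem
      have hpush : pvPush board (stack, seen) n = (n :: stack, seen ++ [n]) := by
        unfold pvPush
        rw [if_pos hcond]
        unfold PySem.Set.add
        rw [if_neg (by
          simp only [Bool.and_eq_true, Bool.not_eq_true'] at hcond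
          rw [hcond.2]
          simp)]
      rw [hpush]
      obtain ⟨Nl, h1, h2, h3, h4, h5⟩ := ih (n :: stack) (seen ++ [n])
      refine ⟨n :: Nl, ?_, ?_, ?_, ?_, ?_⟩
      · rw [h1, List.append_assoc]
        rfl
      · rw [h2]
        simp
      · refine List.Nodup.cons ?_ h3
        intro hmem
        exact (h4 n hmem).2.2 (List.mem_append_right _ (by simp))
      · intro m hm
        rcases List.mem_cons.mp hm with rfl | hm2
        · exact ⟨by simp, hempn, hnot⟩
        · obtain ⟨hin, he, hns⟩ := h4 m hm2
          exact ⟨by simp [hin], he, fun hmem => hns (List.mem_append_left _ hmem)⟩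
      · intro q hq hqe
        rcases List.mem_cons.mp hq with rfl | hq2
        · rw [h1]
          exact List.mem_append_left _ (List.mem_append_right _ (by simp))
        · exact h5 q hq2 hqe
    · have hskip : pvPush board (stack, seen) n = (stack, seen) := by
        unfold pvPush
        rw [if_neg hcond]
      rw [hskip]
      obtain ⟨Nl, h1, h2, h3, h4, h5⟩ := ih stack seen
      refine ⟨Nl, h1, h2, h3, fun m hm => ⟨by simp [(h4 m hm).1], (h4 m hm).2.1, (h4 m hm).2.2⟩, ?_⟩
      intro q hq hqe
      rcases List.mem_cons.mp hq with rfl | hq2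
      · have hmem : q ∈ seen := by
          by_contra hns
          apply hcond
          simp only [hqe, Bool.true_and, Bool.not_eq_true']
          rw [← Bool.not_eq_true, PySem.Set.contains_iff]
          exact hns
        rw [h1]
        exact List.mem_append_left _ hmem
      · exact h5 q hq2 hqe

-- leaving the seen region is only possible through the stack
theorem pvReachEscape (board : List (List Int)) (stack seen : List (Int × Int))
    (H2 : ∀ p ∈ seen, p ∉ stack → ∀ q, pvAdj board p q → q ∈ seen) :
    ∀ p q, p ∈ seen → pvReach board p q → q ∈ seen ∨ ∃ c ∈ stack, pvReach board c q := by
  have main : ∀ p q, pvReach board p q → p ∈ seen →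
      q ∈ seen ∨ ∃ c ∈ stack, pvReach board c q := by
    intro p q h
    induction h using Relation.ReflTransGen.head_induction_on with
    | refl => exact fun hq => Or.inl hq
    | head hstep hrest ih =>
      rename_i a a1
      intro ha
      by_cases has : a ∈ stack
      · exact Or.inr ⟨a, has, Relation.ReflTransGen.head hstep hrest⟩
      · exact ih (H2 a ha has a1 hstep)
  exact fun p q hp h => main p q h hp

-- the DFS loop: full specification
theorem pvDFS_spec (board : List (List Int)) :
    ∀ (fuel : Nat) (stack : List (Int × Int)) (seen : PySem.Set (Int × Int)) (size : Int),
    stack.length + (pvZeros (pvCells board)).length ≤ fuel + seen.length →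
    seen.Nodup → stack.Nodup →
    (∀ p ∈ stack, p ∈ seen) →
    (∀ p ∈ seen, pvEmp board p = true) →
    (∀ p ∈ seen, p ∉ stack → ∀ q, pvAdj board p q → q ∈ seen) →
    ∃ ext : List (Int × Int),
      (pvDFS board fuel stack seen size).1 = seen ++ ext ∧
      (seen ++ ext).Nodup ∧
      (∀ p ∈ seen ++ ext, pvEmp board p = true) ∧
      (∀ q, q ∈ seen ++ ext ↔ q ∈ seen ∨ ∃ c ∈ stack, pvReach board c q) ∧
      (pvDFS board fuel stack seen size).2 = size + stack.length + ext.length := by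
  intro fuel
  induction fuel with
  | zero =>
    intro stack seen size hb hnd hsnd hss hse h2
    match stack, hsnd, hss with
    | [], _, _ =>
      refine ⟨[], by simp [pvDFS], by simpa using hnd, by simpa using hse, ?_, by simp [pvDFS]⟩
      intro q
      simp
    | c :: st, hsnd, hss =>
      exfalso
      have hsub := pvNodup_length_le hnd
        (fun p hp => pvZeros_pvCells_mem.mpr (hse p hp))
      simp only [List.length_cons] at hb
      omega
  | succ fuel ih =>
    intro stack seen size hb hnd hsnd hss hse h2
    match stack, hsnd, hss with
    | [], _, _ =>
      refine ⟨[], by simp [pvDFS], by simpa using hnd, by simpa using hse, ?_, by simp [pvDFS]⟩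
      intro q
      simp
    | c :: st, hsnd, hss =>
      have hstep : pvDFS board (fuel + 1) (c :: st) seen size
          = pvDFS board fuel ((pvNbrs c).foldl (pvPush board) (st, seen)).1
              ((pvNbrs c).foldl (pvPush board) (st, seen)).2 (size + 1) := rfl
      obtain ⟨Nl, h1, h2', h3, h4, h5⟩ := pvPushFold board (pvNbrs c) st seen
      have hcseen : c ∈ seen := hss c (by simp)
      have hcemp : pvEmp board c = true := hse c hcseen
      have hadjNl : ∀ n ∈ Nl, pvAdj board c n := by
        intro n hn
        obtain ⟨hin, hne, _⟩ := h4 n hn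
        exact ⟨hcemp, hne, (pvNbrs_iff c n).mp hin⟩
      have hNlseen : ∀ n ∈ Nl, n ∉ seen := fun n hn => (h4 n hn).2.2
      have hstsub : ∀ p ∈ st, p ∈ seen := fun p hp => hss p (by simp [hp])
      -- the new configuration satisfies all hypotheses
      have hnd1 : (seen ++ Nl).Nodup :=
        hnd.append h3 (fun a ha hb2 => (hNlseen a hb2) ha)
      have hsnd1 : (Nl.reverse ++ st).Nodup := by
        refine (List.nodup_reverse.mpr h3).append (hsnd.of_cons) ?_
        intro a ha hb2
        exact hNlseen a (List.mem_reverse.mp ha) (hstsub a hb2)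
      have hss1 : ∀ p ∈ Nl.reverse ++ st, p ∈ seen ++ Nl := by
        intro p hp
        rcases List.mem_append.mp hp with h | h
        · exact List.mem_append_right _ (List.mem_reverse.mp h)
        · exact List.mem_append_left _ (hstsub p h)
      have hse1 : ∀ p ∈ seen ++ Nl, pvEmp board p = true := by
        intro p hp
        rcases List.mem_append.mp hp with h | h
        · exact hse p h
        · exact (h4 p h).2.1
      have h21 : ∀ p ∈ seen ++ Nl, p ∉ Nl.reverse ++ st →
          ∀ q, pvAdj board p q → q ∈ seen ++ Nl := by
        intro p hp hpns q hadj
        rcases List.mem_append.mp hp with h | h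
        · by_cases hpc : p = c
          · subst hpc
            have hqn : q ∈ pvNbrs p := (pvNbrs_iff p q).mpr hadj.2.2
            have := h5 q hqn hadj.2.1
            rw [h1] at this
            exact this
          · have hpst : p ∉ c :: st := by
              intro hmem
              rcases List.mem_cons.mp hmem with h6 | h6
              · exact hpc h6
              · exact hpns (List.mem_append_right _ h6)
            exact List.mem_append_left _ (h2 p h hpst q hadj)
        · exact absurd (List.mem_append_left _ (List.mem_reverse.mpr h)) hpns
      have hb1 : (Nl.reverse ++ st).length + (pvZeros (pvCells board)).length
          ≤ fuel + (seen ++ Nl).length := by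
        simp only [List.length_append, List.length_reverse, List.length_cons] at *
        omega
      obtain ⟨ext', H1, Hnd, Hemp, Hiff, Hsize⟩ :=
        ih (Nl.reverse ++ st) (seen ++ Nl) (size + 1) hb1 hnd1 hsnd1 hss1 hse1 h21
      rw [hstep, h1, h2']
      refine ⟨Nl ++ ext', by rw [H1, List.append_assoc], ?_, ?_, ?_, ?_⟩
      · rw [← List.append_assoc]
        exact Hnd
      · rw [← List.append_assoc]
        exact Hemp
      · intro q
        rw [← List.append_assoc]
        rw [Hiff q]
        constructor
        · rintro (hq | ⟨c', hc', hr⟩)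
          · rcases List.mem_append.mp hq with h | h
            · exact Or.inl h
            · exact Or.inr ⟨c, by simp,
                Relation.ReflTransGen.single (hadjNl q h)⟩
          · rcases List.mem_append.mp hc' with h | h
            · exact Or.inr ⟨c, by simp,
                (Relation.ReflTransGen.single (hadjNl c' (List.mem_reverse.mp h))).trans hr⟩
            · exact Or.inr ⟨c', by simp [h], hr⟩
        · rintro (hq | ⟨c', hc', hr⟩)
          · exact Or.inl (List.mem_append_left _ hq)
          · rcases List.mem_cons.mp hc' with rfl | h
            · exact pvReachEscape board (Nl.reverse ++ st) (seen ++ Nl) h21 c' q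
                (List.mem_append_left _ hcseen) hr
            · exact Or.inr ⟨c', List.mem_append_right _ h, hr⟩
      · rw [Hsize]
        simp only [List.length_append, List.length_reverse, List.length_cons]
        push_cast
        ring

-- reachable cells are empty cells
theorem pvReach_emp {board : List (List Int)} {q x : Int × Int}
    (h : pvReach board q x) (hq : pvEmp board q = true) : pvEmp board x = true := by
  induction h with
  | refl => exact hq
  | tail hstep htail ih => exact htail.2.1

-- two duplicate-free lists with the same members have the same length
theorem pvLen_eq {L1 L2 : List (Int × Int)} (h1 : L1.Nodup) (h2 : L2.Nodup)
    (h : ∀ x, x ∈ L1 ↔ x ∈ L2) : L1.length = L2.length :=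
  ((List.perm_ext_iff_of_nodup h1 h2).mpr h).length_eq

-- a component of q represented as a duplicate-free list with its size constraint
def pvComp (board : List (List Int)) (q : Int × Int) (L : List (Int × Int)) : Prop :=
  L.Nodup ∧ (∀ p, p ∈ L ↔ pvReach board q p)

-- the invariant of B's outer loop
def pvInvB (board : List (List Int)) (done : List (Int × Int))
    (st : Option (PySem.Set (Int × Int))) : Prop :=
  (∀ q ∈ done, pvEmp board q = true) ∧
  match st with
  | some seen => seen.Nodup ∧ (∀ p, p ∈ seen ↔ ∃ q ∈ done, pvReach board q p) ∧
      (∀ q ∈ done, ∃ L, pvComp board q L ∧ PySem.Int.mod (L.length : Int) 4 = 0)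
  | none => ∃ q ∈ done, ∃ L, pvComp board q L ∧ PySem.Int.mod (L.length : Int) 4 ≠ 0

theorem pvOuterStep_some (board : List (List Int)) (seen : PySem.Set (Int × Int))
    (c : (Int × Int) × Int) :
    pvOuterStep board (some seen) c =
      if (c.2 == 0 && !(PySem.Set.contains seen c.1)) = true then
        (if (PySem.Int.mod (pvDFS board (pvFuel board) [c.1] (PySem.Set.add seen c.1) 0).2 4
            != 0) = true
         then none
         else some (pvDFS board (pvFuel board) [c.1] (PySem.Set.add seen c.1) 0).1)
      else some seen := rfl

theorem pvSimB (board : List (List Int)) :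
    ∀ (cs : List ((Int × Int) × Int)) (done : List (Int × Int))
      (st : Option (PySem.Set (Int × Int))),
    (∀ pt ∈ cs, (pt.2 = 0 ↔ pvEmp board pt.1 = true)) →
    pvInvB board done st →
    pvInvB board (done ++ pvZeros cs) (cs.foldl (pvOuterStep board) st) := by
  intro cs
  induction cs with
  | nil =>
    intro done st _ hinv
    simpa [pvZeros] using hinv
  | cons c cs ih =>
    intro done st hcs hinv
    obtain ⟨⟨p, t⟩, hc⟩ : ∃ pt, pt = c := ⟨c, rfl⟩
    subst hc
    have hct := hcs (p, t) (by simp)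
    have he : done ++ pvZeros ((p, t) :: cs)
        = (if t = 0 then done ++ [p] else done) ++ pvZeros cs := by
      by_cases hz : t = 0 <;> simp [pvZeros, hz]
    rw [List.foldl_cons, he]
    apply ih _ _ (fun pt hpt => hcs pt (by simp [hpt]))
    -- one step preserves the invariant
    obtain ⟨hde, hrest⟩ := hinv
    by_cases hz : t = 0
    · subst hz
      have hpe : pvEmp board p = true := hct.mp rfl
      rw [if_pos rfl]
      match st, hrest with
      | none, hrest =>
        obtain ⟨q, hq, hbad⟩ := hrest
        exact ⟨fun q' hq' => by
            rcases List.mem_append.mp hq' with h | h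
            · exact hde q' h
            · rw [List.mem_singleton.mp h]; exact hpe,
          ⟨q, List.mem_append_left _ hq, hbad⟩⟩
      | some seen, hrest =>
        obtain ⟨hnd, hchar, hgood⟩ := hrest
        have hde' : ∀ q ∈ done ++ [p], pvEmp board q = true := by
          intro q' hq'
          rcases List.mem_append.mp hq' with h | h
          · exact hde q' h
          · rw [List.mem_singleton.mp h]; exact hpe
        by_cases hmem : p ∈ seen
        · have hcontains : (PySem.Set.contains seen p) = true :=
            (PySem.Set.contains_iff seen p).mpr hmem
          show pvInvB board (done ++ [p])
            (pvOuterStep board (some seen) ((p, 0) : (Int × Int) × Int))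
          rw [pvOuterStep_some, if_neg (by simp [hmem])]
          obtain ⟨q0, hq0, hr0⟩ := (hchar p).mp hmem
          refine ⟨hde', hnd, ?_, ?_⟩
          · intro r
            rw [hchar r]
            constructor
            · rintro ⟨q, hq, hrq⟩
              exact ⟨q, List.mem_append_left _ hq, hrq⟩
            · rintro ⟨q, hq, hrq⟩
              rcases List.mem_append.mp hq with h | h
              · exact ⟨q, h, hrq⟩
              · rw [List.mem_singleton.mp h] at hrq
                exact ⟨q0, hq0, hr0.trans hrq⟩
          · intro q hq
            rcases List.mem_append.mp hq with h | h
            · exact hgood q h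
            · rw [List.mem_singleton.mp h]
              obtain ⟨L, ⟨hLnd, hLc⟩, hLm⟩ := hgood q0 hq0
              refine ⟨L, ⟨hLnd, fun r => ?_⟩, hLm⟩
              rw [hLc r]
              exact ⟨fun hx => (pvReach_symm hr0).trans hx, fun hx => hr0.trans hx⟩
        · -- new component: run the DFS
          have hcontains : (PySem.Set.contains seen p) = false := by
            rw [← Bool.not_eq_true, PySem.Set.contains_iff]
            exact hmem
          have hadd : PySem.Set.add seen p = seen ++ [p] := by
            unfold PySem.Set.add
            rw [if_neg (by rw [hcontains]; simp)]
          show pvInvB board (done ++ [p])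
            (pvOuterStep board (some seen) ((p, 0) : (Int × Int) × Int))
          rw [pvOuterStep_some, if_pos (by simp [hmem])]
          rw [show (((p, 0) : (Int × Int) × Int).1) = p from rfl, hadd]
          have hseen_emp : ∀ x ∈ seen, pvEmp board x = true := by
            intro x hx
            obtain ⟨q, hq, hrq⟩ := (hchar x).mp hx
            exact pvReach_emp hrq (hde q hq)
          have hclosed : ∀ x ∈ seen, ∀ r, pvAdj board x r → r ∈ seen := by
            intro x hx r hadj
            obtain ⟨q, hq, hrq⟩ := (hchar x).mp hx
            exact (hchar r).mpr ⟨q, hq, hrq.trans (Relation.ReflTransGen.single hadj)⟩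
          obtain ⟨ext, H1, Hnd, Hemp, Hiff, Hsize⟩ :=
            pvDFS_spec board (pvFuel board) [p] (seen ++ [p]) 0
              (by
                have := pvAllEmp_len board
                unfold pvFuel
                simp only [List.length_cons, List.length_nil, List.length_append]
                omega)
              (hnd.append (List.nodup_singleton p)
                (fun a ha hb => (List.mem_singleton.mp hb ▸ hmem) ha))
              (List.nodup_singleton p)
              (fun q hq => List.mem_append_right _ hq)
              (by
                intro q hq
                rcases List.mem_append.mp hq with h | h
                · exact hseen_emp q h
                · rw [List.mem_singleton.mp h]; exact hpe)
              (by
                intro q hq hqs r hadj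
                rcases List.mem_append.mp hq with h | h
                · exact List.mem_append_left _ (hclosed q h r hadj)
                · exact absurd h hqs)
          -- the freshly discovered cells are exactly the component of p
          have hdisj := List.disjoint_of_nodup_append Hnd
          have hLchar : ∀ x, x ∈ p :: ext ↔ pvReach board p x := by
            intro x
            constructor
            · intro hx
              rcases List.mem_cons.mp hx with rfl | hx2
              · exact Relation.ReflTransGen.refl
              · have := (Hiff x).mp (List.mem_append_right _ hx2)
                rcases this with h | ⟨c', hc', hr⟩
                · exact absurd h (fun hh => hdisj hh hx2)
                · rw [List.mem_singleton.mp hc'] at hr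
                  exact hr
            · intro hx
              have := (Hiff x).mpr (Or.inr ⟨p, by simp, hx⟩)
              rcases List.mem_append.mp this with h | h
              · rcases List.mem_append.mp h with h2 | h2
                · exfalso
                  obtain ⟨q, hq, hrq⟩ := (hchar x).mp h2
                  exact hmem ((hchar p).mpr ⟨q, hq, hrq.trans (pvReach_symm hx)⟩)
                · exact List.mem_cons.mpr (Or.inl (List.mem_singleton.mp h2))
              · exact List.mem_cons.mpr (Or.inr h)
          have hLnd : (p :: ext).Nodup := by
            refine List.Nodup.cons ?_ (Hnd.of_append_right)
            intro hmem2
            exact hdisj (List.mem_append_right _ (by simp)) hmem2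
          have hsize2 : (pvDFS board (pvFuel board) [p] (seen ++ [p]) 0).2
              = ((p :: ext).length : Int) := by
            rw [Hsize]
            simp only [List.length_cons, List.length_nil]
            push_cast
            ring
          by_cases hmod : PySem.Int.mod (pvDFS board (pvFuel board) [p] (seen ++ [p]) 0).2 4 = 0
          · have hbool : (PySem.Int.mod (pvDFS board (pvFuel board) [p] (seen ++ [p]) 0).2 4
                != 0) = false := by
              rw [hmod]
              rfl
            rw [hbool, if_neg Bool.false_ne_true, H1]
            refine ⟨hde', H1 ▸ Hnd, ?_, ?_⟩
            · intro r
              constructor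
              · intro hr
                rcases List.mem_append.mp hr with h | h
                · rcases List.mem_append.mp h with h2 | h2
                  · obtain ⟨q, hq, hrq⟩ := (hchar r).mp h2
                    exact ⟨q, List.mem_append_left _ hq, hrq⟩
                  · exact ⟨p, List.mem_append_right _ (by simp),
                      by rw [List.mem_singleton.mp h2]; exact Relation.ReflTransGen.refl⟩
                · exact ⟨p, List.mem_append_right _ (by simp),
                    (hLchar r).mp (List.mem_cons.mpr (Or.inr h))⟩
              · rintro ⟨q, hq, hrq⟩
                rcases List.mem_append.mp hq with h | h
                · exact List.mem_append_left _ (List.mem_append_left _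
                    ((hchar r).mpr ⟨q, h, hrq⟩))
                · rw [List.mem_singleton.mp h] at hrq
                  rcases List.mem_cons.mp ((hLchar r).mpr hrq) with rfl | h2
                  · exact List.mem_append_left _ (List.mem_append_right _ (by simp))
                  · exact List.mem_append_right _ h2
            · intro q hq
              rcases List.mem_append.mp hq with h | h
              · exact hgood q h
              · rw [List.mem_singleton.mp h]
                exact ⟨p :: ext, ⟨hLnd, hLchar⟩, by rw [← hsize2]; exact hmod⟩
          · rw [if_pos (bne_iff_ne.mpr hmod)]
            exact ⟨hde', p, List.mem_append_right _ (by simp),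
              p :: ext, ⟨hLnd, hLchar⟩, by rw [← hsize2]; exact hmod⟩
    · rw [if_neg hz]
      match st, hrest with
      | none, hrest =>
        exact ⟨hde, hrest⟩
      | some seen, hrest =>
        show pvInvB board done (pvOuterStep board (some seen) ((p, t) : (Int × Int) × Int))
        rw [pvOuterStep_some, if_neg (by simp [hz])]
        exact ⟨hde, hrest⟩

-- cells of the scan are exactly the board entries
theorem pvCells_zero_iff (board : List (List Int)) :
    ∀ pt ∈ pvCells board, (pt.2 = 0 ↔ pvEmp board pt.1 = true) := by
  intro pt hpt
  rw [pvCells_mem_iff] at hpt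
  obtain ⟨a, k, ha, hk, rfl⟩ := hpt
  constructor
  · intro h0
    exact pvEmp_iff.mpr ⟨a, k, ha, rfl, hk, h0⟩
  · intro hemp
    obtain ⟨a', k', ha', heq, hk', h0⟩ := pvEmp_iff.mp hemp
    have ha2 : a = a' := by
      have := (Prod.mk.injEq .. ▸ heq : ((a : Int) = (a' : Int) ∧ (k : Int) = (k' : Int)))
      omega
    have hk2 : k = k' := by
      have := (Prod.mk.injEq .. ▸ heq : ((a : Int) = (a' : Int) ∧ (k : Int) = (k' : Int)))
      omega
    subst ha2
    subst hk2
    exact h0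

-- the two ports agree
theorem pvMainEq (board : List (List Int)) :
    findemptyregions board = findemptyregions_alt board := by
  have hinvA0 : pvInvA board [] [] := by
    refine ⟨by simp, by simp, ?_, ?_, ?_, by simp⟩
    · intro i j hi hj
      simp at hi
    · intro i hi
      simp at hi
    · intro i j hi hj
      simp at hi
  have hA := pvSimA board (pvCells board) [] [] (pvSeq_main board) hinvA0
  rw [List.nil_append] at hA
  obtain ⟨A1, A2, A3, A4, A5, A6⟩ := hA
  have hdoneF : ∀ p : Int × Int, p ∈ pvZeros (pvCells board) ↔ pvEmp board p = true :=
    fun p => pvZeros_pvCells_mem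
  -- every region is (as a set) the component of any of its members
  have hRC : ∀ i, (hi : i < ((pvCells board).foldl (pvStepA board) []).length) →
      ∀ q, q ∈ ((pvCells board).foldl (pvStepA board) [])[i] →
      ∀ x, (x ∈ ((pvCells board).foldl (pvStepA board) [])[i] ↔ pvReach board q x) := by
    intro i hi q hq x
    constructor
    · intro hx
      exact pvReachIn_reach (A4 i hi q x hq hx)
    · intro hx
      have hin : pvReachIn board (pvZeros (pvCells board)) q x :=
        (pvReach_iff_reachIn (fun p hp => (hdoneF p).mpr hp)).mp hx
      rcases pvReachIn_cases hin with rfl | ⟨_, hxd⟩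
      · exact hq
      · obtain ⟨r, hr, hxr⟩ := (A2 x).mp hxd
        obtain ⟨j, hj, rfl⟩ := List.getElem_of_mem hr
        have := A5 i j hi hj q x hq hxr hin
        subst this
        exact hxr
  have hinvB0 : pvInvB board [] (some PySem.Set.empty) := by
    refine ⟨by simp, List.nodup_nil, ?_, by simp⟩
    intro p
    show p ∈ ([] : List (Int × Int)) ↔ _
    simp
  have hB := pvSimB board (pvCells board) [] (some PySem.Set.empty)
    (pvCells_zero_iff board) hinvB0
  rw [List.nil_append] at hB
  unfold findemptyregions findemptyregions_alt
  cases hstF : (pvCells board).foldl (pvOuterStep board) (some PySem.Set.empty) with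
  | none =>
    rw [hstF] at hB
    obtain ⟨_, q, hqd, L, ⟨hLnd, hLch⟩, hLmod⟩ := hB
    obtain ⟨r, hr, hqr⟩ := (A2 q).mp hqd
    obtain ⟨i, hi, rfl⟩ := List.getElem_of_mem hr
    have hlen : (((pvCells board).foldl (pvStepA board) [])[i]).length = L.length :=
      pvLen_eq (A1 _ (List.getElem_mem _)).2 hLnd
        (fun x => (hRC i hi q hqr x).trans (hLch x).symm)
    show ((pvCells board).foldl (pvStepA board) []).all
      (fun reg => PySem.Int.mod (PySem.List.len reg) 4 == 0) = false
    rw [List.all_eq_false]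
    refine ⟨_, List.getElem_mem hi, ?_⟩
    rw [PySem.List.len_eq, hlen]
    simp only [beq_iff_eq]
    exact hLmod
  | some seen =>
    rw [hstF] at hB
    obtain ⟨_, _, _, hgood⟩ := hB
    show ((pvCells board).foldl (pvStepA board) []).all
      (fun reg => PySem.Int.mod (PySem.List.len reg) 4 == 0) = true
    rw [List.all_eq_true]
    intro r hr
    obtain ⟨i, hi, rfl⟩ := List.getElem_of_mem hr
    obtain ⟨q, hq⟩ := List.exists_mem_of_ne_nil _ (A1 _ hr).1
    have hqd : q ∈ pvZeros (pvCells board) :=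
      (A2 q).mpr ⟨_, hr, hq⟩
    obtain ⟨L, ⟨hLnd, hLch⟩, hLmod⟩ := hgood q hqd
    have hlen : (((pvCells board).foldl (pvStepA board) [])[i]).length = L.length :=
      pvLen_eq (A1 _ hr).2 hLnd
        (fun x => (hRC i hi q hq x).trans (hLch x).symm)
    rw [PySem.List.len_eq, hlen]
    exact beq_iff_eq.mpr hLmod

-- ===== VERDICT (by name: the statement is the Claim_ definition above) =====
theorem findemptyregions_spec : Claim_equal_findemptyregions := by
  intro board _ _
  show findemptyregions board = findemptyregions_alt board
  exact pvMainEq board
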